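-- pv_equiv track=rewrite | github.com/juy4556/PythonAlgorithm | 코드트리/고대 문명 유적 탐사.py | has_found
-- ===== SOURCE A (Python) =====
-- from collections import deque
--
-- dx = [-1, 0, 1, 0]
--
-- dy = [0, 1, 0, -1]
--
-- def has_found(space):
--     visited = [[0 for _ in range(len(space[0]))] for _ in range(len(space))]
--     count = 0
--     delete_set = set()
--     idx = 1
--
--     for i in range(len(space)):
--         for j in range(len(space[0])):
--             if visited[i][j] == 0:
--                 visited, cnt = bfs(space, visited, i, j, idx)
--
--                 if cnt >= 3:
--                     count += cnt
--                     delete_set.add(idx)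
--
--                 idx += 1
--
--     return space, visited, delete_set, count
--
-- def bfs(space, visited, a, b, idx):
--     count = 0
--     num = space[a][b]
--     q = deque()
--     q.append((a, b))
--     visited[a][b] = idx
--
--     while (q):
--         x, y = q.popleft()
--         count += 1
--         for d in range(4):
--             nx = x + dx[d]
--             ny = y + dy[d]
--             if is_not_in_range(nx, ny, len(space), len(space[0])):
--                 continue
--             if visited[nx][ny] or space[nx][ny] != num:
--                 continue
--
--             visited[nx][ny] = idx
--             q.append((nx, ny))
--
--     return visited, count
--
-- def is_not_in_range(x, y, row_length, col_length):
--     return x < 0 or x >= row_length or y < 0 or y >= col_length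
-- ===== SOURCE B (Python) =====
-- dx = [-1, 0, 1, 0]
-- dy = [0, 1, 0, -1]
--
-- def has_found(space):
--     R = len(space)
--     C = len(space[0]) if space else 0
--     n = R * C
--     vals = [space[i][j] for i in range(R) for j in range(C)]
--     parent = list(range(n))
--
--     def find(a):
--         while parent[a] != a:
--             a = parent[a]
--         return a
--
--     def union(a, b):
--         ra, rb = find(a), find(b)
--         if ra == rb:
--             return
--         if ra < rb:
--             parent[rb] = ra
--         else:
--             parent[ra] = rb
--
--     for k in range(n):
--         if (k + 1) % C != 0 and vals[k] == vals[k + 1]: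
--             union(k, k + 1)
--         if k + C < n and vals[k] == vals[k + C]:
--             union(k, k + C)
--
--     root = [find(k) for k in range(n)]
--     size = {}
--     for k in range(n):
--         size[root[k]] = size.get(root[k], 0) + 1
--
--     label = {}
--     delete_set = set()
--     count = 0
--     idx = 1
--     for k in range(n):
--         r = root[k]
--         if r not in label:
--             label[r] = idx
--             if size[r] >= 3:
--                 delete_set.add(idx)
--                 count += size[r]
--             idx += 1
--
--     labels = [label[root[k]] for k in range(n)]
--     visited = [labels[i * C:(i + 1) * C] for i in range(R)]
--     return space, visited, delete_set, count
-- ===== Notes on version B (the rewrite author's own statement) =====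
-- stated objective: alternative
-- what changed: Replaces the per-seed BFS flood fill with a disjoint-set union-find over flattened cell indices: one pass unions each cell with its equal-valued right/down neighbour (union-by-min, so every component's root is its smallest cell in row-major order), then separate passes compute component sizes, assign labels in first-seen root order, and build the visited grid, the delete set and the count.
import Mathlib
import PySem

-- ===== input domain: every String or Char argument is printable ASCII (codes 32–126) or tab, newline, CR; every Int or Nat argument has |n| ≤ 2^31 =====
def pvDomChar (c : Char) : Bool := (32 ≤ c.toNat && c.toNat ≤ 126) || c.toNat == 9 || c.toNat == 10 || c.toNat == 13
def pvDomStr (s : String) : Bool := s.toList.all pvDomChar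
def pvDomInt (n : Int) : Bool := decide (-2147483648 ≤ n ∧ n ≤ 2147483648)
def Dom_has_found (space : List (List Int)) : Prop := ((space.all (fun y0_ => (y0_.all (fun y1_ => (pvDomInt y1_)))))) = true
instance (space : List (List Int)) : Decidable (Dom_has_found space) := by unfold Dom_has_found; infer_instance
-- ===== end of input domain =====

-- B replaces A's per-seed BFS flood fill by a union-find over flattened cells (union-by-min, so
-- each component's root is its smallest cell in row-major order), then derives sizes, labels and
-- the result in separate passes.  Equivalence is about the return value; neither program mutates
-- its argument observably.

abbrev PVMat := List (List Int)
abbrev PVCell := Int × Int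

-- ===== PORT A =====
-- matrix indexing/assignment helpers: m[i][j] reads, m[i][j] = a writes
-- (exact for the 0 ≤ i < len, 0 ≤ j < row-len accesses the programs make)
def mget (m : PVMat) (i j : Int) : Int := PySem.List.pyGetD (PySem.List.pyGetD m i []) j 0
def mset (m : PVMat) (i j a : Int) : PVMat :=
  PySem.List.pySetD m i (PySem.List.pySetD (PySem.List.pyGetD m i []) j a)

def pvDx : List Int := [-1, 0, 1, 0]
def pvDy : List Int := [0, 1, 0, -1]

-- one direction d of the inner 'for d in range(4)' body: 'is_not_in_range' guard, visited/value
-- guard, then mark and append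
def tryCell (sp : PVMat) (num idx R C : Int) (st : PVMat × List PVCell) (nx ny : Int) :
    PVMat × List PVCell :=
  if nx < 0 ∨ R ≤ nx ∨ ny < 0 ∨ C ≤ ny then st
  else if mget st.1 nx ny ≠ 0 ∨ mget sp nx ny ≠ num then st
  else (mset st.1 nx ny idx, st.2 ++ [(nx, ny)])

-- the 'for d in range(4)' loop: returns the updated visited and the cells appended, in order
def expand (sp : PVMat) (num idx R C : Int) (v : PVMat) (x y : Int) : PVMat × List PVCell :=
  (PySem.List.pyRange 0 4 1).foldl
    (fun st d =>
      tryCell sp num idx R C st (x + PySem.List.pyGetD pvDx d 0) (y + PySem.List.pyGetD pvDy d 0))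
    (v, [])

-- A's 'while q' loop: q.popleft() from the front, discovered cells appended at the back (FIFO).
-- fuel bounds the number of iterations; has_found passes R*C+1 which always suffices
-- (each popped cell was enqueued exactly once, and enqueues mark a fresh cell).
def bfsLoop (sp : PVMat) (num idx R C : Int) :
    Nat → List PVCell → PVMat → Int → PVMat × Int
  | _, [], v, c => (v, c)
  | 0, _ :: _, v, c => (v, c)
  | f + 1, (x, y) :: w, v, c =>
      let p := expand sp num idx R C v x y
      bfsLoop sp num idx R C f (w ++ p.2) p.1 (c + 1)

-- python bfs(space, visited, a, b, idx)
def pvBfs (sp v : PVMat) (a b idx : Int) (fuel : Nat) : PVMat × Int :=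
  let num := mget sp a b
  bfsLoop sp num idx (sp.length : Int) ((sp.headD []).length : Int) fuel
    [(a, b)] (mset v a b idx) 0

def has_found (space : List (List Int)) :
    List (List Int) × List (List Int) × List Int × Int :=
  let R : Int := (space.length : Int)
  let C : Int := ((space.headD []).length : Int)       -- len(space[0]); Python only evaluates it
                                                       -- when space ≠ [] (lazy comprehension/loop
                                                       -- headers), and headD gives 0 there, on
                                                       -- which every loop below is empty — exact
  let fuel : Nat := space.length * (space.headD []).length + 1
  let v0 : PVMat :=
    (PySem.List.pyRange 0 R 1).map (fun _ => (PySem.List.pyRange 0 C 1).map (fun _ => (0 : Int)))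
  let st :=
    (PySem.List.pyRange 0 R 1).foldl (fun st i =>
      (PySem.List.pyRange 0 C 1).foldl (fun (st : PVMat × Int × List Int × Int) j =>
        if mget st.1 i j = 0 then
          let r := pvBfs space st.1 i j st.2.2.2 fuel
          ((r.1),
           (if 3 ≤ r.2 then st.2.1 + r.2 else st.2.1),
           (if 3 ≤ r.2 then PySem.Set.add st.2.2.1 st.2.2.2 else st.2.2.1),
           st.2.2.2 + 1)
        else st) st)
      (v0, 0, ([] : List Int), 1)
  (space, st.1, st.2.2.1, st.2.1)

-- ===== PORT B =====
-- python's 'while parent[a] != a: a = parent[a]' with fuel; has_found_alt passes len(parent),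
-- which always suffices because every parent pointer it creates points strictly downwards
def ufFind (parent : List Int) : Nat → Int → Int
  | 0, a => a
  | f + 1, a =>
      if PySem.List.pyGetD parent a 0 ≠ a then ufFind parent f (PySem.List.pyGetD parent a 0)
      else a

-- python union(a, b): attach the larger root below the smaller one
def ufUnion (parent : List Int) (a b : Int) : List Int :=
  let ra := ufFind parent parent.length a
  let rb := ufFind parent parent.length b
  if ra = rb then parent
  else if ra < rb then PySem.List.pySetD parent rb ra
  else PySem.List.pySetD parent ra rb

def has_found_alt (space : List (List Int)) :
    List (List Int) × List (List Int) × List Int × Int :=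
  let R : Int := (space.length : Int)
  let C : Int := ((space.headD []).length : Int)       -- len(space[0]) if space else 0
  let n : Int := R * C
  let vals : List Int :=
    (PySem.List.pyRange 0 R 1).flatMap (fun i =>
      (PySem.List.pyRange 0 C 1).map (fun j => mget space i j))
  let parent : List Int :=
    (PySem.List.pyRange 0 n 1).foldl (fun p k =>
      let p1 := if PySem.Int.mod (k + 1) C ≠ 0 ∧
                   PySem.List.pyGetD vals k 0 = PySem.List.pyGetD vals (k + 1) 0
                then ufUnion p k (k + 1) else p
      if k + C < n ∧ PySem.List.pyGetD vals k 0 = PySem.List.pyGetD vals (k + C) 0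
      then ufUnion p1 k (k + C) else p1)
      (PySem.List.pyRange 0 n 1)
  let root : List Int :=
    (PySem.List.pyRange 0 n 1).map (fun k => ufFind parent parent.length k)
  let size : PySem.Dict Int Int :=
    (PySem.List.pyRange 0 n 1).foldl (fun d k =>
      PySem.Dict.insert d (PySem.List.pyGetD root k 0)
        (PySem.Dict.getD d (PySem.List.pyGetD root k 0) 0 + 1)) PySem.Dict.empty
  let st :=
    (PySem.List.pyRange 0 n 1).foldl
      (fun (st : PySem.Dict Int Int × List Int × Int × Int) k =>
        let r := PySem.List.pyGetD root k 0
        if ¬ PySem.Dict.contains st.1 r then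
          let label := PySem.Dict.insert st.1 r st.2.2.2
          if 3 ≤ PySem.Dict.getD size r 0 then
            (label, PySem.Set.add st.2.1 st.2.2.2, st.2.2.1 + PySem.Dict.getD size r 0,
             st.2.2.2 + 1)
          else (label, st.2.1, st.2.2.1, st.2.2.2 + 1)
        else st)
      (PySem.Dict.empty, ([] : List Int), (0 : Int), (1 : Int))
  let labels : List Int :=
    (PySem.List.pyRange 0 n 1).map (fun k =>
      PySem.Dict.getD st.1 (PySem.List.pyGetD root k 0) 0)
  let visited : List (List Int) :=
    (PySem.List.pyRange 0 R 1).map (fun i =>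
      PySem.List.slice labels (some (i * C)) (some ((i + 1) * C)))
  (space, visited, st.2.1, st.2.2.1)

-- ===== PRECONDITION & SPEC =====
-- Pre_ excludes exactly the inputs on which the Python A raises IndexError: grids with a
-- row shorter than row 0 (space[nx][ny] is probed there while scanning the grid).
def Pre_has_found (space : List (List Int)) : Prop :=
  ∀ r ∈ space, (space.headD []).length ≤ r.length
instance (space : List (List Int)) : Decidable (Pre_has_found space) := by
  unfold Pre_has_found; infer_instance

def pvWitness_has_found : List (List Int) := [[1, 1, 1], [2, 1, 2]]

def Spec_has_found (space : List (List Int))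
    (out : List (List Int) × List (List Int) × List Int × Int) : Prop :=
  out = has_found_alt space
instance (space : List (List Int)) (out : List (List Int) × List (List Int) × List Int × Int) :
    Decidable (Spec_has_found space out) := by unfold Spec_has_found; infer_instance

-- ===== CLAIM (what is proved, stated in full; the proofs are below) =====
def Claim_equal_has_found : Prop :=
  ∀ (space : List (List Int)), Dom_has_found space → Pre_has_found space →
    Spec_has_found space (has_found space)

-- ===== LEMMAS AND PROOFS =====

-- ---- proof-side notions (matrices) ----

def VDim (v : PVMat) (R C : Nat) : Prop := v.length = R ∧ ∀ r ∈ v, r.length = C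

def qc (sp : PVMat) (num : Int) (R C : Nat) (v : PVMat) (p : PVCell) : Bool :=
  decide (0 ≤ p.1 ∧ p.1 < (R : Int) ∧ 0 ≤ p.2 ∧ p.2 < (C : Int) ∧
          mget v p.1 p.2 = 0 ∧ mget sp p.1 p.2 = num)

def markAll (idx : Int) (v : PVMat) (ps : List PVCell) : PVMat :=
  ps.foldl (fun m p => mset m p.1 p.2 idx) v

-- ---- mget / mset basics ----

theorem mget_nn (v : PVMat) (i j : Int) (hi : 0 ≤ i) (hj : 0 ≤ j) :
    mget v i j = (v.getD i.toNat []).getD j.toNat 0 := by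
  simp [mget, PySem.List.pyGetD_of_nonneg _ _ hi, PySem.List.pyGetD_of_nonneg _ _ hj]

theorem mset_nn (v : PVMat) (i j a : Int) (hi : 0 ≤ i) (hj : 0 ≤ j) :
    mset v i j a = v.set i.toNat ((v.getD i.toNat []).set j.toNat a) := by
  rw [mset, PySem.List.pyGetD_of_nonneg _ _ hi, PySem.List.pySetD_of_nonneg _ _ hj,
      PySem.List.pySetD_of_nonneg _ _ hi]

theorem getD_mem_row {v : PVMat} (n : Nat) (hn : n < v.length) : v.getD n [] ∈ v := by
  rw [List.getD_eq_getElem?_getD, List.getElem?_eq_getElem hn]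
  exact List.getElem_mem hn

theorem VDim_mset {v : PVMat} {R C : Nat} (h : VDim v R C) (i j a : Int)
    (hi : 0 ≤ i) (hj : 0 ≤ j) : VDim (mset v i j a) R C := by
  obtain ⟨hlen, hrow⟩ := h
  rw [mset_nn v i j a hi hj]
  by_cases hlt : i.toNat < v.length
  · refine ⟨by simpa using hlen, ?_⟩
    intro r hr
    rcases List.mem_or_eq_of_mem_set hr with h1 | h2
    · exact hrow r h1
    · subst h2
      simpa using hrow _ (getD_mem_row _ hlt)
  · rw [List.set_eq_of_length_le (by omega)]
    exact ⟨hlen, hrow⟩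

theorem row_len {v : PVMat} {R C : Nat} (h : VDim v R C) {n : Nat} (hn : n < v.length) :
    (v.getD n []).length = C := h.2 _ (getD_mem_row n hn)

theorem mget_mset_self {v : PVMat} {R C : Nat} (h : VDim v R C) (i j a : Int)
    (hi : 0 ≤ i) (hiR : i < (R : Int)) (hj : 0 ≤ j) (hjC : j < (C : Int)) :
    mget (mset v i j a) i j = a := by
  have hiL : i.toNat < v.length := by have := h.1; omega
  have hrl : (v.getD i.toNat []).length = C := row_len h hiL
  have hjL : j.toNat < (v.getD i.toNat []).length := by rw [hrl]; omega
  rw [mset_nn v i j a hi hj, mget_nn _ i j hi hj]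
  have h1 : (v.set i.toNat ((v.getD i.toNat []).set j.toNat a)).getD i.toNat []
      = (v.getD i.toNat []).set j.toNat a := by
    rw [List.getD_eq_getElem?_getD, List.getElem?_set_self hiL]; rfl
  rw [h1, List.getD_eq_getElem?_getD, List.getElem?_set_self hjL]; rfl

theorem mget_mset_ne {v : PVMat} (i j i' j' a : Int)
    (hi : 0 ≤ i) (hj : 0 ≤ j) (hi' : 0 ≤ i') (hj' : 0 ≤ j')
    (hne : ¬(i = i' ∧ j = j')) :
    mget (mset v i j a) i' j' = mget v i' j' := by
  rw [mset_nn v i j a hi hj, mget_nn _ i' j' hi' hj', mget_nn v i' j' hi' hj']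
  by_cases hii : i = i'
  · have hjj : j.toNat ≠ j'.toNat := by omega
    subst hii
    by_cases hlt : i.toNat < v.length
    · have h1 : (v.set i.toNat ((v.getD i.toNat []).set j.toNat a)).getD i.toNat []
          = (v.getD i.toNat []).set j.toNat a := by
        rw [List.getD_eq_getElem?_getD, List.getElem?_set_self hlt]; rfl
      rw [h1, List.getD_eq_getElem?_getD, List.getElem?_set_ne hjj,
          ← List.getD_eq_getElem?_getD]
    · rw [List.set_eq_of_length_le (by omega)]
  · have hii' : i.toNat ≠ i'.toNat := by omega
    have h1 : (v.set i.toNat ((v.getD i.toNat []).set j.toNat a)).getD i'.toNat []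
        = v.getD i'.toNat [] := by
      rw [List.getD_eq_getElem?_getD, List.getElem?_set_ne hii', ← List.getD_eq_getElem?_getD]
    rw [h1]

-- ---- qc / tryCell / expand characterization ----

def nbrs (x y : Int) : List PVCell := [(x - 1, y), (x, y + 1), (x + 1, y), (x, y - 1)]

def filterQ (sp : PVMat) (num : Int) (R C : Nat) (v : PVMat) (x y : Int) : List PVCell :=
  (nbrs x y).filter (qc sp num R C v)

theorem nbrs_nodup (x y : Int) : (nbrs x y).Nodup := by
  simp [nbrs, Prod.ext_iff]
  omega

theorem qc_true_iff {sp : PVMat} {num : Int} {R C : Nat} {v : PVMat} {p : PVCell} :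
    qc sp num R C v p = true ↔
      0 ≤ p.1 ∧ p.1 < (R : Int) ∧ 0 ≤ p.2 ∧ p.2 < (C : Int) ∧
      mget v p.1 p.2 = 0 ∧ mget sp p.1 p.2 = num := by
  simp [qc]

theorem qc_mset {sp : PVMat} {num : Int} {R C : Nat} {v : PVMat} {idx : Int}
    (q p : PVCell) (hq1 : 0 ≤ q.1) (hq2 : 0 ≤ q.2) (hne : p ≠ q) :
    qc sp num R C (mset v q.1 q.2 idx) p = qc sp num R C v p := by
  by_cases hp : 0 ≤ p.1 ∧ 0 ≤ p.2
  · have hm : mget (mset v q.1 q.2 idx) p.1 p.2 = mget v p.1 p.2 := by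
      apply mget_mset_ne _ _ _ _ _ hq1 hq2 hp.1 hp.2
      intro hc
      exact hne (Prod.ext_iff.2 ⟨hc.1.symm, hc.2.symm⟩)
    simp only [qc, hm]
  · simp only [qc, decide_eq_decide]
    constructor <;> rintro ⟨h1, h2, h3, h4, h5, h6⟩ <;> exact absurd ⟨h1, h3⟩ hp

theorem tryCell_eq (sp : PVMat) (num idx : Int) (R C : Nat) (v : PVMat) (acc : List PVCell)
    (nx ny : Int) :
    tryCell sp num idx (R : Int) (C : Int) (v, acc) nx ny =
      if qc sp num R C v (nx, ny) then (mset v nx ny idx, acc ++ [(nx, ny)]) else (v, acc) := by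
  unfold tryCell
  by_cases h1 : nx < 0 ∨ (R : Int) ≤ nx ∨ ny < 0 ∨ (C : Int) ≤ ny
  · rw [if_pos h1]
    rw [if_neg (by simp [qc]; intro a b c d; exfalso; omega)]
  · rw [if_neg h1]
    by_cases h2 : mget v nx ny ≠ 0 ∨ mget sp nx ny ≠ num
    · rw [if_pos h2, if_neg (by simp [qc]; intro a b c d e f; exact absurd (Or.elim h2 (fun hh => hh e) (fun hh => hh f)) (by simp))]
    · rw [if_neg h2, if_pos (by push Not at h1 h2; simp [qc]; exact ⟨by omega, by omega, by omega, by omega, h2.1, h2.2⟩)]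

-- the for-d loop over any duplicate-free cell list: marks and collects the qualifying cells
theorem foldl_tryCell (sp : PVMat) (num idx : Int) (R C : Nat) :
    ∀ (cells : List PVCell) (v : PVMat) (acc : List PVCell),
      cells.Nodup → VDim v R C →
      cells.foldl (fun st p => tryCell sp num idx (R : Int) (C : Int) st p.1 p.2) (v, acc) =
        (markAll idx v (cells.filter (qc sp num R C v)),
         acc ++ cells.filter (qc sp num R C v)) := by
  intro cells
  induction cells with
  | nil => intro v acc _ _; simp [markAll]
  | cons p rest ih =>
    intro v acc hnd hdim
    have hnd' := (List.nodup_cons.1 hnd).2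
    have hpr := (List.nodup_cons.1 hnd).1
    by_cases hq : qc sp num R C v p = true
    · have hb := qc_true_iff.1 hq
      have hdim' : VDim (mset v p.1 p.2 idx) R C := VDim_mset hdim _ _ _ hb.1 hb.2.2.1
      have hfilt : rest.filter (qc sp num R C (mset v p.1 p.2 idx)) =
          rest.filter (qc sp num R C v) := by
        apply List.filter_congr
        intro q hqr
        exact qc_mset p q hb.1 hb.2.2.1 (fun hc => hpr (hc ▸ hqr))
      simp only [List.foldl_cons, tryCell_eq, hq, if_true]
      rw [ih _ _ hnd' hdim', hfilt]
      simp [hq, markAll]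
    · simp only [List.foldl_cons, tryCell_eq, hq]
      rw [if_neg (by simp [hq]), ih _ _ hnd' hdim]
      simp [List.filter_cons, hq]

theorem expand_eq_foldl (sp : PVMat) (num idx : Int) (R C : Nat) (v : PVMat) (x y : Int) :
    expand sp num idx (R : Int) (C : Int) v x y =
      (nbrs x y).foldl (fun st p => tryCell sp num idx (R : Int) (C : Int) st p.1 p.2) (v, []) := by
  have hrange : PySem.List.pyRange 0 4 1 = [0, 1, 2, 3] := by decide
  have d0 : PySem.List.pyGetD pvDx (0 : Int) 0 = -1 := by decide
  have d1 : PySem.List.pyGetD pvDx (1 : Int) 0 = 0 := by decide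
  have d2 : PySem.List.pyGetD pvDx (2 : Int) 0 = 1 := by decide
  have d3 : PySem.List.pyGetD pvDx (3 : Int) 0 = 0 := by decide
  have e0 : PySem.List.pyGetD pvDy (0 : Int) 0 = 0 := by decide
  have e1 : PySem.List.pyGetD pvDy (1 : Int) 0 = 1 := by decide
  have e2 : PySem.List.pyGetD pvDy (2 : Int) 0 = 0 := by decide
  have e3 : PySem.List.pyGetD pvDy (3 : Int) 0 = -1 := by decide
  simp only [expand, hrange, nbrs, List.foldl_cons, List.foldl_nil, d0, d1, d2, d3, e0, e1, e2, e3]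
  norm_num [sub_eq_add_neg]

theorem expand_spec (sp : PVMat) (num idx : Int) (R C : Nat) (v : PVMat) (x y : Int)
    (hdim : VDim v R C) :
    expand sp num idx (R : Int) (C : Int) v x y =
      (markAll idx v (filterQ sp num R C v x y), filterQ sp num R C v x y) := by
  rw [expand_eq_foldl, foldl_tryCell sp num idx R C _ _ _ (nbrs_nodup x y) hdim]
  simp [filterQ]

-- ---- markAll / U (count of unvisited cells) ----

def U (v : PVMat) : Nat := (v.map (fun r => r.countP (fun z => z == 0))).sum

theorem VDim_markAll {sp : PVMat} {num : Int} {R C : Nat} (idx : Int) :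
    ∀ (ps : List PVCell) (v : PVMat), (∀ p ∈ ps, qc sp num R C v p = true ∨ (0 ≤ p.1 ∧ 0 ≤ p.2)) →
      VDim v R C → VDim (markAll idx v ps) R C := by
  intro ps
  induction ps with
  | nil => intro v _ h; exact h
  | cons q rest ih =>
    intro v hb hdim
    have hq : 0 ≤ q.1 ∧ 0 ≤ q.2 := by
      rcases hb q (by simp) with h | h
      · have := qc_true_iff.1 h; exact ⟨this.1, this.2.2.1⟩
      · exact h
    exact ih _ (fun p hp => Or.inr (by
        rcases hb p (by simp [hp]) with h | h
        · have := qc_true_iff.1 h; exact ⟨this.1, this.2.2.1⟩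
        · exact h))
      (VDim_mset hdim _ _ _ hq.1 hq.2)

theorem mget_markAll {sp : PVMat} {num : Int} {R C : Nat} {idx : Int} :
    ∀ (ps : List PVCell) (v : PVMat), VDim v R C →
      (∀ p ∈ ps, qc sp num R C v p = true ∨
        (0 ≤ p.1 ∧ p.1 < (R : Int) ∧ 0 ≤ p.2 ∧ p.2 < (C : Int))) →
      ∀ (i j : Int), 0 ≤ i → 0 ≤ j →
        mget (markAll idx v ps) i j = if (i, j) ∈ ps then idx else mget v i j := by
  intro ps
  induction ps with
  | nil => intro v _ _ i j _ _; simp [markAll]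
  | cons q rest ih =>
    intro v hdim hb i j hi hj
    have hqb : 0 ≤ q.1 ∧ q.1 < (R : Int) ∧ 0 ≤ q.2 ∧ q.2 < (C : Int) := by
      rcases hb q (by simp) with h | h
      · have := qc_true_iff.1 h; exact ⟨this.1, this.2.1, this.2.2.1, this.2.2.2.1⟩
      · exact h
    have hdim' : VDim (mset v q.1 q.2 idx) R C := VDim_mset hdim _ _ _ hqb.1 hqb.2.2.1
    have hb' : ∀ p ∈ rest, qc sp num R C (mset v q.1 q.2 idx) p = true ∨
        (0 ≤ p.1 ∧ p.1 < (R : Int) ∧ 0 ≤ p.2 ∧ p.2 < (C : Int)) := by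
      intro p hp
      rcases hb p (by simp [hp]) with h | h
      · have := qc_true_iff.1 h
        exact Or.inr ⟨this.1, this.2.1, this.2.2.1, this.2.2.2.1⟩
      · exact Or.inr h
    have hstep := ih (mset v q.1 q.2 idx) hdim' hb' i j hi hj
    show mget (markAll idx (mset v q.1 q.2 idx) rest) i j = _
    rw [hstep]
    by_cases hmem : (i, j) ∈ rest
    · simp [hmem]
    · simp only [hmem, if_false, List.mem_cons]
      by_cases hiq : (i, j) = q
      · subst hiq
        simp only at hqb ⊢
        rw [mget_mset_self hdim i j idx hi hqb.2.1 hj hqb.2.2.2]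
        simp
      · rw [mget_mset_ne _ _ _ _ _ hqb.1 hqb.2.2.1 hi hj
            (fun hc => hiq (by cases hc; subst_vars; rcases q with ⟨a, b⟩; simp_all))]
        simp [hiq, hmem]

theorem countP_set_zero :
    ∀ (l : List Int) (n : Nat) (a : Int), n < l.length → l.getD n 0 = 0 → a ≠ 0 →
      (l.set n a).countP (fun z => z == 0) + 1 = l.countP (fun z => z == 0) := by
  intro l
  induction l with
  | nil => intro n a h; simp at h
  | cons x t ih =>
    intro n a hn h0 ha
    cases n with
    | zero =>
      simp only [List.getD_cons_zero] at h0
      subst h0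
      simp [List.countP_cons, ha]
    | succ m =>
      simp only [List.getD_cons_succ] at h0
      have := ih m a (by simpa using hn) h0 ha
      simp [List.set_cons_succ, List.countP_cons]
      omega

theorem sum_set_nat :
    ∀ (l : List Nat) (n : Nat) (b : Nat), n < l.length →
      (l.set n b).sum + l.getD n 0 = l.sum + b := by
  intro l
  induction l with
  | nil => intro n b h; simp at h
  | cons x t ih =>
    intro n b hn
    cases n with
    | zero => simp [List.set_cons_zero]; omega
    | succ m =>
      have := ih m b (by simpa using hn)
      simp only [List.set_cons_succ, List.sum_cons, List.getD_cons_succ]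
      omega

theorem U_mset {v : PVMat} {R C : Nat} (h : VDim v R C) (i j idx : Int)
    (hi : 0 ≤ i) (hiR : i < (R : Int)) (hj : 0 ≤ j) (hjC : j < (C : Int))
    (h0 : mget v i j = 0) (hidx : idx ≠ 0) :
    U (mset v i j idx) + 1 = U v := by
  have hiL : i.toNat < v.length := by have := h.1; omega
  have hrl : (v.getD i.toNat []).length = C := row_len h hiL
  have hjL : j.toNat < (v.getD i.toNat []).length := by rw [hrl]; omega
  rw [mget_nn v i j hi hj] at h0
  rw [mset_nn v i j idx hi hj]
  unfold U
  rw [List.map_set]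
  have hmL : i.toNat < (v.map (fun r => r.countP (fun z => z == 0))).length := by simpa using hiL
  have hsum := sum_set_nat (v.map (fun r => r.countP (fun z => z == 0))) i.toNat
      (((v.getD i.toNat []).set j.toNat idx).countP (fun z => z == 0)) hmL
  have hgd : (v.map (fun r => r.countP (fun z => z == 0))).getD i.toNat 0 =
      (v.getD i.toNat []).countP (fun z => z == 0) := by
    rw [List.getD_eq_getElem?_getD, List.getElem?_map, List.getD_eq_getElem?_getD,
        List.getElem?_eq_getElem hiL]
    simp
  rw [hgd] at hsum
  have hcnt := countP_set_zero (v.getD i.toNat []) j.toNat idx hjL h0 hidx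
  omega

theorem U_markAll {sp : PVMat} {num : Int} {R C : Nat} {idx : Int} (hidx : idx ≠ 0) :
    ∀ (ps : List PVCell) (v : PVMat), VDim v R C → ps.Nodup →
      (∀ p ∈ ps, qc sp num R C v p = true) →
      U (markAll idx v ps) + ps.length = U v := by
  intro ps
  induction ps with
  | nil => intro v _ _ _; simp [markAll]
  | cons q rest ih =>
    intro v hdim hnd hq
    have hqq := qc_true_iff.1 (hq q (by simp))
    have hdim' : VDim (mset v q.1 q.2 idx) R C := VDim_mset hdim _ _ _ hqq.1 hqq.2.2.1
    have hrest : ∀ p ∈ rest, qc sp num R C (mset v q.1 q.2 idx) p = true := by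
      intro p hp
      rw [qc_mset q p hqq.1 hqq.2.2.1 (fun hc => (List.nodup_cons.1 hnd).1 (hc ▸ hp))]
      exact hq p (by simp [hp])
    have h1 := ih (mset v q.1 q.2 idx) hdim' (List.nodup_cons.1 hnd).2 hrest
    have h2 := U_mset hdim q.1 q.2 idx hqq.1 hqq.2.1 hqq.2.2.1 hqq.2.2.2.1 hqq.2.2.2.2.1 hidx
    show U (markAll idx (mset v q.1 q.2 idx) rest) + (rest.length + 1) = U v
    omega

theorem U_le {C : Nat} : ∀ (v : PVMat), (∀ r ∈ v, r.length = C) → U v ≤ v.length * C := by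
  intro v
  induction v with
  | nil => intro _; simp [U]
  | cons r t ih =>
    intro h
    have h1 : r.countP (fun z => z == 0) ≤ C := by
      have := List.countP_le_length (l := r) (p := fun z => z == 0)
      rw [h r (by simp)] at this
      exact this
    have h2 := ih (fun r hr => h r (by simp [hr]))
    simp only [U, List.map_cons, List.sum_cons, List.length_cons] at *
    calc r.countP (fun z => z == 0) + (t.map fun r => r.countP fun z => z == 0).sum
        ≤ C + t.length * C := by omega
      _ = (t.length + 1) * C := by ring

theorem filterQ_qc {sp : PVMat} {num : Int} {R C : Nat} {v : PVMat} {x y : Int} :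
    ∀ p ∈ filterQ sp num R C v x y, qc sp num R C v p = true := by
  intro p hp
  exact (List.mem_filter.1 hp).2

theorem filterQ_nodup (sp : PVMat) (num : Int) (R C : Nat) (v : PVMat) (x y : Int) :
    (filterQ sp num R C v x y).Nodup := (nbrs_nodup x y).filter _

theorem VDim_markAll_filterQ {sp : PVMat} {num : Int} {R C : Nat} {v : PVMat} (idx x y : Int)
    (hdim : VDim v R C) : VDim (markAll idx v (filterQ sp num R C v x y)) R C :=
  VDim_markAll idx _ v (fun p hp => Or.inl (filterQ_qc p hp)) hdim

-- ---- the canonical worklist runner for A's BFS loop ----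

def runF? (sp : PVMat) (num idx : Int) (R C : Nat) :
    Nat → List PVCell → PVMat → Int → Option (PVMat × Int)
  | _, [], v, c => some (v, c)
  | 0, _ :: _, _, _ => none
  | f + 1, (x, y) :: w, v, c =>
      runF? sp num idx R C f (w ++ filterQ sp num R C v x y)
        (markAll idx v (filterQ sp num R C v x y)) (c + 1)

theorem runF?_isSome {sp : PVMat} {num idx : Int} {R C : Nat} (hidx : idx ≠ 0) :
    ∀ (f : Nat) (w : List PVCell) (v : PVMat) (c : Int),
      VDim v R C → w.length + U v ≤ f → (runF? sp num idx R C f w v c).isSome := by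
  intro f
  induction f with
  | zero =>
    intro w v c hdim hle
    have : w = [] := by cases w with | nil => rfl | cons p w => simp at hle
    subst this
    simp [runF?]
  | succ g ih =>
    intro w v c hdim hle
    cases w with
    | nil => simp [runF?]
    | cons p w =>
      obtain ⟨x, y⟩ := p
      have hU := U_markAll (sp := sp) (num := num) hidx (filterQ sp num R C v x y) v hdim
        (filterQ_nodup _ _ _ _ _ _ _) filterQ_qc
      show (runF? sp num idx R C g (w ++ filterQ sp num R C v x y) _ _).isSome
      apply ih _ _ _ (VDim_markAll_filterQ idx x y hdim)
      simp only [List.length_cons, List.length_append] at hle ⊢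
      omega

-- A's fueled loop computes the runner's value whenever the runner returns
theorem bfsLoop_eq {sp : PVMat} {num idx : Int} {R C : Nat} :
    ∀ (f : Nat) (w : List PVCell) (v : PVMat) (c : Int) (r : PVMat × Int), VDim v R C →
      runF? sp num idx R C f w v c = some r →
      bfsLoop sp num idx (R : Int) (C : Int) f w v c = r := by
  intro f
  induction f with
  | zero =>
    intro w v c r _ hr
    cases w with
    | nil => simp [runF?] at hr; simp [bfsLoop, hr]
    | cons p w => simp [runF?] at hr
  | succ g ih =>
    intro w v c r hdim hr
    cases w with
    | nil => simp [runF?] at hr; simp [bfsLoop, hr]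
    | cons p w =>
      obtain ⟨x, y⟩ := p
      show bfsLoop sp num idx (R : Int) (C : Int) g
          (w ++ (expand sp num idx (R : Int) (C : Int) v x y).2)
          (expand sp num idx (R : Int) (C : Int) v x y).1 (c + 1) = r
      rw [expand_spec sp num idx R C v x y hdim]
      exact ih _ _ _ _ (VDim_markAll_filterQ idx x y hdim) hr

-- matrices with equal dimensions and equal entries are equal
theorem mat_ext {v w : PVMat} {R C : Nat} (hv : VDim v R C) (hw : VDim w R C)
    (h : ∀ (n m : Nat), n < R → m < C → mget v (n : Int) (m : Int) = mget w (n : Int) (m : Int)) :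
    v = w := by
  obtain ⟨hv1, hv2⟩ := hv
  obtain ⟨hw1, hw2⟩ := hw
  apply List.ext_getElem (by omega)
  intro n hn1 hn2
  have hrv : v[n].length = C := hv2 _ (List.getElem_mem hn1)
  have hrw : w[n].length = C := hw2 _ (List.getElem_mem hn2)
  apply List.ext_getElem (by omega)
  intro m hm1 hm2
  have hh := h n m (by omega) (by omega)
  rw [mget_nn _ _ _ (Int.natCast_nonneg n) (Int.natCast_nonneg m),
      mget_nn _ _ _ (Int.natCast_nonneg n) (Int.natCast_nonneg m)] at hh
  simp only [Int.toNat_natCast] at hh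
  have e1 : v.getD n [] = v[n] := by
    rw [List.getD_eq_getElem?_getD, List.getElem?_eq_getElem hn1]; rfl
  have e2 : w.getD n [] = w[n] := by
    rw [List.getD_eq_getElem?_getD, List.getElem?_eq_getElem hn2]; rfl
  rw [e1, e2] at hh
  have e3 : v[n].getD m 0 = v[n][m] := by
    rw [List.getD_eq_getElem?_getD, List.getElem?_eq_getElem hm1]; rfl
  have e4 : w[n].getD m 0 = w[n][m] := by
    rw [List.getD_eq_getElem?_getD, List.getElem?_eq_getElem hm2]; rfl
  rw [e3, e4] at hh
  exact hh

theorem set_add_fresh (del : List Int) (idx : Int) (h : idx ∉ del) :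
    PySem.Set.add del idx = del ++ [idx] := by
  simp [PySem.Set.add]
  exact h


-- ---- union-find: the root function of a parent array and its theory ----

-- proof-side root of k: follow parent pointers while they point strictly downwards
def rootP (p : List Int) (k : Nat) : Nat :=
  if h : (p.getD k 0).toNat < k then rootP p (p.getD k 0).toNat else k
termination_by k

-- bounds invariant of a parent array built by union-by-min
def PBnd (n : Nat) (p : List Int) : Prop :=
  p.length = n ∧ ∀ k, k < n → 0 ≤ p.getD k 0 ∧ p.getD k 0 ≤ (k : Int)

theorem rootP_le (p : List Int) : ∀ k, rootP p k ≤ k := by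
  intro k
  induction k using Nat.strong_induction_on with
  | _ k ih =>
    rw [rootP]
    split
    · exact le_of_lt (lt_of_le_of_lt (ih _ ‹_›) ‹_›)
    · exact le_refl k

theorem rootP_getD_self {n : Nat} {p : List Int} (hb : PBnd n p) :
    ∀ k, k < n → p.getD (rootP p k) 0 = ((rootP p k : Nat) : Int) := by
  intro k
  induction k using Nat.strong_induction_on with
  | _ k ih =>
    intro hk
    rw [rootP]
    split
    · exact ih _ ‹_› (by omega)
    · obtain ⟨h0, h1⟩ := hb.2 k hk
      omega

theorem rootP_rootP {n : Nat} {p : List Int} (hb : PBnd n p) (k : Nat) (hk : k < n) :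
    rootP p (rootP p k) = rootP p k := by
  have h := rootP_getD_self hb k hk
  rw [rootP]
  split
  · omega
  · rfl

theorem ufFind_eq_rootP {n : Nat} {p : List Int} (hb : PBnd n p) :
    ∀ (f k : Nat), k < n → k < f → ufFind p f (k : Int) = ((rootP p k : Nat) : Int) := by
  intro f
  induction f with
  | zero => intro k _ h; omega
  | succ g ih =>
    intro k hk hf
    obtain ⟨h0, h1⟩ := hb.2 k hk
    show (if PySem.List.pyGetD p (k : Int) 0 ≠ (k : Int) then _ else _) = _
    rw [PySem.List.pyGetD_natCast]
    by_cases he : p.getD k 0 = (k : Int)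
    · rw [if_neg (by simpa using he)]
      rw [rootP]
      rw [dif_neg (by omega)]
    · rw [if_pos (by simpa using he)]
      have hlt : (p.getD k 0).toNat < k := by omega
      have hcast : p.getD k 0 = (((p.getD k 0).toNat : Nat) : Int) := by omega
      rw [hcast, ih _ (by omega) (by omega)]
      conv_rhs => rw [rootP, dif_pos hlt]

-- ---- connectivity generated by a list of edges ----

def SymCl (E : List (Nat × Nat)) (a b : Nat) : Prop := (a, b) ∈ E ∨ (b, a) ∈ E

def ConnL (E : List (Nat × Nat)) : Nat → Nat → Prop := Relation.ReflTransGen (SymCl E)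

theorem symCl_symm {E : List (Nat × Nat)} {a b : Nat} (h : SymCl E a b) : SymCl E b a :=
  h.symm

theorem connL_symm {E : List (Nat × Nat)} {a b : Nat} (h : ConnL E a b) : ConnL E b a :=
  Relation.ReflTransGen.symmetric (fun _ _ hh => symCl_symm hh) h

theorem connL_mono {E E' : List (Nat × Nat)} (hm : ∀ a b, SymCl E a b → SymCl E' a b)
    {a b : Nat} (h : ConnL E a b) : ConnL E' a b :=
  Relation.ReflTransGen.mono hm h

theorem connL_nil {a b : Nat} (h : ConnL [] a b) : a = b := by
  induction h with
  | refl => rfl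
  | tail _ hstep ih => rcases hstep with h | h <;> simp at h

theorem symCl_append_single {E : List (Nat × Nat)} {a b x y : Nat} :
    SymCl (E ++ [(a, b)]) x y ↔ SymCl E x y ∨ (x = a ∧ y = b) ∨ (x = b ∧ y = a) := by
  simp [SymCl, Prod.ext_iff]
  tauto

theorem connL_append_single {E : List (Nat × Nat)} {a b x y : Nat} :
    ConnL (E ++ [(a, b)]) x y ↔
      ConnL E x y ∨ (ConnL E x a ∧ ConnL E b y) ∨ (ConnL E x b ∧ ConnL E a y) := by
  constructor
  · intro h
    induction h with
    | refl => exact Or.inl .refl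
    | tail _ hstep ih =>
      rename_i z w _
      rcases symCl_append_single.1 hstep with hE | ⟨hz, hw⟩ | ⟨hz, hw⟩
      · rcases ih with h1 | ⟨h1, h2⟩ | ⟨h1, h2⟩
        · exact Or.inl (h1.tail hE)
        · exact Or.inr (Or.inl ⟨h1, h2.tail hE⟩)
        · exact Or.inr (Or.inr ⟨h1, h2.tail hE⟩)
      · subst hz; subst hw
        rcases ih with h1 | ⟨h1, h2⟩ | ⟨h1, h2⟩
        · exact Or.inr (Or.inl ⟨h1, .refl⟩)
        · exact Or.inr (Or.inl ⟨h1, .refl⟩)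
        · exact Or.inl h1
      · subst hz; subst hw
        rcases ih with h1 | ⟨h1, h2⟩ | ⟨h1, h2⟩
        · exact Or.inr (Or.inr ⟨h1, .refl⟩)
        · exact Or.inl h1
        · exact Or.inr (Or.inr ⟨h1, .refl⟩)
  · intro h
    have hmono : ∀ x y, SymCl E x y → SymCl (E ++ [(a, b)]) x y := by
      intro x y hh
      rcases hh with hh | hh
      · exact Or.inl (List.mem_append_left _ hh)
      · exact Or.inr (List.mem_append_left _ hh)
    have hab : ConnL (E ++ [(a, b)]) a b :=
      Relation.ReflTransGen.single (Or.inl (List.mem_append_right _ (by simp)))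
    rcases h with h1 | ⟨h1, h2⟩ | ⟨h1, h2⟩
    · exact connL_mono hmono h1
    · exact ((connL_mono hmono h1).trans hab).trans (connL_mono hmono h2)
    · exact ((connL_mono hmono h1).trans (connL_symm hab)).trans (connL_mono hmono h2)

-- ---- the union-find invariant and its preservation ----

def UFInv (n : Nat) (E : List (Nat × Nat)) (p : List Int) : Prop :=
  PBnd n p ∧ (∀ k, k < n → ConnL E k (rootP p k)) ∧
  (∀ k m, k < n → m < n → ConnL E k m → rootP p k = rootP p m)

theorem getD_set_int (p : List Int) (r k : Nat) (v : Int) (hk : k < p.length) :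
    (p.set r v).getD k 0 = if k = r then (if r < p.length then v else p.getD k 0)
      else p.getD k 0 := by
  by_cases hkr : k = r
  · subst hkr
    by_cases hr : k < p.length
    · simp only [if_pos rfl, if_pos hr]
      rw [List.getD_eq_getElem?_getD, List.getElem?_set_self hr]; rfl
    · omega
  · simp only [if_neg hkr]
    rw [List.getD_eq_getElem?_getD, List.getElem?_set_ne (fun h => hkr h.symm),
        ← List.getD_eq_getElem?_getD]

theorem rootP_set {n : Nat} {p : List Int} (hb : PBnd n p) (rmin rmax : Nat)
    (hmm : rmin < rmax) (hmaxn : rmax < n)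
    (hrmax : rootP p rmax = rmax) (hrmin : rootP p rmin = rmin) :
    ∀ k, k < n → rootP (p.set rmax (rmin : Int)) k =
      if rootP p k = rmax then rmin else rootP p k := by
  intro k
  induction k using Nat.strong_induction_on with
  | _ k ih =>
    intro hk
    have hlen : k < p.length := by have := hb.1; omega
    have hget := getD_set_int p rmax k (rmin : Int) hlen
    by_cases hkr : k = rmax
    · subst hkr
      rw [rootP]
      have hv : (p.set k (rmin : Int)).getD k 0 = (rmin : Int) := by
        rw [hget]; simp [hlen]
      rw [hv]
      have : (rmin : Int).toNat = rmin := by omega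
      rw [dif_pos (by omega)]
      rw [this]
      rw [ih rmin (by omega) (by omega)]
      rw [hrmin, if_neg (by omega), hrmax, if_pos rfl]
    · rw [rootP]
      have hv : (p.set rmax (rmin : Int)).getD k 0 = p.getD k 0 := by
        rw [hget]; simp [hkr]
      rw [hv]
      by_cases hlt : (p.getD k 0).toNat < k
      · rw [dif_pos hlt]
        rw [ih _ hlt (by omega)]
        conv_rhs => rw [rootP, dif_pos hlt]
      · rw [dif_neg hlt]
        have : rootP p k = k := by rw [rootP, dif_neg hlt]
        rw [this, if_neg hkr]

theorem attach_inv {n : Nat} {E : List (Nat × Nat)} {p : List Int}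
    (h : UFInv n E p) {a b : Nat} (ha : a < n) (hbn : b < n)
    {rmin rmax : Nat} (hmm : rmin < rmax)
    (hcase : (rmin = rootP p a ∧ rmax = rootP p b) ∨ (rmin = rootP p b ∧ rmax = rootP p a)) :
    UFInv n (E ++ [(a, b)]) (p.set rmax (rmin : Int)) := by
  obtain ⟨hbnd, hconn, hcls⟩ := h
  have hrlea := rootP_le p a
  have hrleb := rootP_le p b
  have hman : rmax < n := by rcases hcase with ⟨_, h2⟩ | ⟨_, h2⟩ <;> omega
  have hmin : rmin < n := by rcases hcase with ⟨h1, _⟩ | ⟨h1, _⟩ <;> omega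
  have hrmax : rootP p rmax = rmax := by
    rcases hcase with ⟨_, h2⟩ | ⟨_, h2⟩ <;> rw [h2] <;>
      exact rootP_rootP hbnd _ (by omega)
  have hrmin : rootP p rmin = rmin := by
    rcases hcase with ⟨h1, _⟩ | ⟨h1, _⟩ <;> rw [h1] <;>
      exact rootP_rootP hbnd _ (by omega)
  have hrs := rootP_set hbnd rmin rmax hmm hman hrmax hrmin
  have hmono : ∀ x y, SymCl E x y → SymCl (E ++ [(a, b)]) x y := by
    intro x y hh
    rcases hh with hh | hh
    · exact Or.inl (List.mem_append_left _ hh)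
    · exact Or.inr (List.mem_append_left _ hh)
  have hab : ConnL (E ++ [(a, b)]) a b :=
    Relation.ReflTransGen.single (Or.inl (List.mem_append_right _ (by simp)))
  have hminmax : ConnL (E ++ [(a, b)]) rmax rmin := by
    rcases hcase with ⟨h1, h2⟩ | ⟨h1, h2⟩
    · -- rmin = root a, rmax = root b
      have c1 : ConnL E b rmax := h2 ▸ hconn b hbn
      have c2 : ConnL E a rmin := h1 ▸ hconn a ha
      exact ((connL_symm (connL_mono hmono c1)).trans (connL_symm hab)).trans
        (connL_mono hmono c2)
    · have c1 : ConnL E a rmax := h2 ▸ hconn a ha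
      have c2 : ConnL E b rmin := h1 ▸ hconn b hbn
      exact ((connL_symm (connL_mono hmono c1)).trans hab).trans (connL_mono hmono c2)
  refine ⟨⟨by simpa using hbnd.1, ?_⟩, ?_, ?_⟩
  · intro k hk
    have hlenk : k < p.length := by have := hbnd.1; omega
    rw [getD_set_int p rmax k (rmin : Int) hlenk]
    by_cases hkr : k = rmax
    · rw [if_pos hkr, if_pos (show rmax < p.length by have := hbnd.1; omega)]
      omega
    · rw [if_neg hkr]
      exact hbnd.2 k hk
  · intro k hk
    rw [hrs k hk]
    by_cases hcr : rootP p k = rmax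
    · rw [if_pos hcr]
      have c1 : ConnL (E ++ [(a, b)]) k rmax := hcr ▸ connL_mono hmono (hconn k hk)
      exact c1.trans hminmax
    · rw [if_neg hcr]
      exact connL_mono hmono (hconn k hk)
  · intro k m hk hm hkm
    rw [hrs k hk, hrs m hm]
    rcases connL_append_single.1 hkm with h1 | ⟨h1, h2⟩ | ⟨h1, h2⟩
    · rw [hcls k m hk hm h1]
    · -- k ~ a, b ~ m
      have e1 : rootP p k = rootP p a := hcls k a hk ha h1
      have e2 : rootP p m = rootP p b := hcls m b hm hbn (connL_symm h2)
      rcases hcase with ⟨hc1, hc2⟩ | ⟨hc1, hc2⟩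
      · rw [e1, e2, ← hc1, ← hc2, if_neg (by omega), if_pos rfl]
      · rw [e1, e2, ← hc1, ← hc2, if_pos rfl, if_neg (by omega)]
    · have e1 : rootP p k = rootP p b := hcls k b hk hbn h1
      have e2 : rootP p m = rootP p a := hcls m a hm ha (connL_symm h2)
      rcases hcase with ⟨hc1, hc2⟩ | ⟨hc1, hc2⟩
      · rw [e1, e2, ← hc1, ← hc2, if_pos rfl, if_neg (by omega)]
      · rw [e1, e2, ← hc1, ← hc2, if_neg (by omega), if_pos rfl]

theorem ufUnion_inv {n : Nat} {E : List (Nat × Nat)} {p : List Int}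
    (h : UFInv n E p) {a b : Nat} (ha : a < n) (hbn : b < n) :
    UFInv n (E ++ [(a, b)]) (ufUnion p (a : Int) (b : Int)) := by
  have hlen : p.length = n := h.1.1
  have hfa : ufFind p p.length (a : Int) = ((rootP p a : Nat) : Int) :=
    ufFind_eq_rootP h.1 p.length a ha (by omega)
  have hfb : ufFind p p.length (b : Int) = ((rootP p b : Nat) : Int) :=
    ufFind_eq_rootP h.1 p.length b hbn (by omega)
  unfold ufUnion
  rw [hfa, hfb]
  by_cases he : rootP p a = rootP p b
  · rw [if_pos (by exact_mod_cast he)]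
    obtain ⟨hbnd, hconn, hcls⟩ := h
    have hmono : ∀ x y, SymCl E x y → SymCl (E ++ [(a, b)]) x y := by
      intro x y hh
      rcases hh with hh | hh
      · exact Or.inl (List.mem_append_left _ hh)
      · exact Or.inr (List.mem_append_left _ hh)
    refine ⟨hbnd, fun k hk => connL_mono hmono (hconn k hk), ?_⟩
    intro k m hk hm hkm
    rcases connL_append_single.1 hkm with h1 | ⟨h1, h2⟩ | ⟨h1, h2⟩
    · exact hcls k m hk hm h1
    · rw [hcls k a hk ha h1, he, ← hcls m b hm hbn (connL_symm h2)]
    · rw [hcls k b hk hbn h1, ← he, ← hcls m a hm ha (connL_symm h2)]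
  · rw [if_neg (by exact_mod_cast he)]
    by_cases hlt : rootP p a < rootP p b
    · rw [if_pos (by exact_mod_cast hlt)]
      rw [PySem.List.pySetD_natCast]
      have := attach_inv h ha hbn hlt (Or.inl ⟨rfl, rfl⟩)
      simpa using this
    · rw [if_neg (by exact_mod_cast hlt)]
      rw [PySem.List.pySetD_natCast]
      have hlt' : rootP p b < rootP p a := by omega
      have := attach_inv h ha hbn hlt' (Or.inr ⟨rfl, rfl⟩)
      simpa using this

theorem uf_fold {n : Nat} :
    ∀ (es pre : List (Nat × Nat)) (p : List Int), UFInv n pre p →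
      (∀ e ∈ es, e.1 < n ∧ e.2 < n) →
      UFInv n (pre ++ es) (es.foldl (fun p e => ufUnion p (e.1 : Int) (e.2 : Int)) p) := by
  intro es
  induction es with
  | nil => intro pre p h _; simpa using h
  | cons e rest ih =>
    intro pre p h hb
    have h1 := ufUnion_inv h (hb e (by simp)).1 (hb e (by simp)).2
    have h2 := ih (pre ++ [(e.1, e.2)]) _ h1 (fun x hx => hb x (by simp [hx]))
    simpa using h2


-- ---- the canonical component data, defined from B's union-find ----

def Rn (space : PVMat) : Nat := space.length
def Cn (space : PVMat) : Nat := (space.headD []).length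
def nno (space : PVMat) : Nat := Rn space * Cn space

def valF (space : PVMat) (k : Nat) : Int :=
  mget space ((k / Cn space : Nat) : Int) ((k % Cn space : Nat) : Int)

def cellOf (space : PVMat) (k : Nat) : PVCell :=
  (((k / Cn space : Nat) : Int), ((k % Cn space : Nat) : Int))

-- the (ordered) list of unions B performs, as Nat pairs
def edgesL (space : PVMat) : List (Nat × Nat) :=
  (List.range (nno space)).flatMap (fun k =>
    (if (k + 1) % Cn space ≠ 0 ∧ valF space k = valF space (k + 1)
     then [(k, k + 1)] else []) ++
    (if k + Cn space < nno space ∧ valF space k = valF space (k + Cn space)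
     then [(k, k + Cn space)] else []))

def parentB (space : PVMat) : List Int :=
  (edgesL space).foldl (fun p e => ufUnion p (e.1 : Int) (e.2 : Int))
    (PySem.List.pyRange 0 ((nno space : Nat) : Int) 1)

def rho (space : PVMat) (k : Nat) : Nat := rootP (parentB space) k

def ConnS (space : PVMat) : Nat → Nat → Prop := ConnL (edgesL space)

def labN (space : PVMat) (r : Nat) : Nat :=
  1 + (List.range r).countP (fun m => rho space m == m)

def szN (space : PVMat) (r : Nat) : Nat :=
  (List.range (nno space)).countP (fun m => rho space m == r)

def bigL (space : PVMat) : List Nat :=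
  (List.range (nno space)).filter (fun r => rho space r == r && decide (3 ≤ szN space r))

def visSpec (space : PVMat) : PVMat :=
  (List.range (Rn space)).map (fun i =>
    (List.range (Cn space)).map (fun j => ((labN space (rho space (i * Cn space + j)) : Nat) : Int)))

def delSpec (space : PVMat) : List Int :=
  (bigL space).map (fun r => ((labN space r : Nat) : Int))

def cntSpec (space : PVMat) : Int :=
  ((bigL space).map (fun r => ((szN space r : Nat) : Int))).sum

-- ---- facts about edgesL, the invariant for parentB, and the ρ facts ----

theorem right_edge_lt {space : PVMat} {a : Nat} (ha : a < nno space)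
    (hm : (a + 1) % Cn space ≠ 0) : a + 1 < nno space := by
  rcases Nat.lt_or_ge (a + 1) (nno space) with h | h
  · exact h
  have : a + 1 = nno space := by omega
  rw [this] at hm
  exact absurd (Nat.mul_mod_left (Rn space) (Cn space)) hm

theorem mem_edgesL {space : PVMat} {a b : Nat} :
    (a, b) ∈ edgesL space ↔
      a < nno space ∧ valF space a = valF space b ∧
        ((b = a + 1 ∧ (a + 1) % Cn space ≠ 0) ∨ (b = a + Cn space ∧ a + Cn space < nno space)) := by
  unfold edgesL
  simp only [List.mem_flatMap, List.mem_range, List.mem_append]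
  constructor
  · rintro ⟨k, hk, hmem | hmem⟩
    · split at hmem
      · rename_i hcond
        simp only [List.mem_singleton, Prod.ext_iff] at hmem
        obtain ⟨rfl, rfl⟩ := hmem
        exact ⟨hk, hcond.2, Or.inl ⟨rfl, hcond.1⟩⟩
      · simp at hmem
    · split at hmem
      · rename_i hcond
        simp only [List.mem_singleton, Prod.ext_iff] at hmem
        obtain ⟨rfl, rfl⟩ := hmem
        exact ⟨hk, hcond.2, Or.inr ⟨rfl, hcond.1⟩⟩
      · simp at hmem
  · rintro ⟨ha, hv, ⟨rfl, hm⟩ | ⟨rfl, hlt⟩⟩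
    · exact ⟨a, ha, Or.inl (by rw [if_pos ⟨hm, hv⟩]; simp)⟩
    · exact ⟨a, ha, Or.inr (by rw [if_pos ⟨hlt, hv⟩]; simp)⟩

theorem edgesL_bounds {space : PVMat} :
    ∀ e ∈ edgesL space, e.1 < nno space ∧ e.2 < nno space := by
  rintro ⟨a, b⟩ he
  obtain ⟨ha, _, hc⟩ := mem_edgesL.1 he
  rcases hc with ⟨rfl, hm⟩ | ⟨rfl, hlt⟩
  · exact ⟨ha, right_edge_lt ha hm⟩
  · exact ⟨ha, hlt⟩

theorem parent0_getD (n : Nat) (k : Nat) (hk : k < n) :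
    (PySem.List.pyRange 0 ((n : Nat) : Int) 1).getD k 0 = (k : Int) := by
  rw [PySem.List.pyRange_zero_natCast]
  rw [List.getD_eq_getElem?_getD, List.getElem?_map,
      List.getElem?_eq_getElem (by simpa using hk)]
  simp

theorem uf_main (space : PVMat) : UFInv (nno space) (edgesL space) (parentB space) := by
  have hinit : UFInv (nno space) [] (PySem.List.pyRange 0 ((nno space : Nat) : Int) 1) := by
    have hb : PBnd (nno space) (PySem.List.pyRange 0 ((nno space : Nat) : Int) 1) := by
      constructor
      · rw [PySem.List.pyRange_zero_natCast]; simp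
      · intro k hk
        rw [parent0_getD _ k hk]
        omega
    refine ⟨hb, ?_, ?_⟩
    · intro k hk
      have : rootP (PySem.List.pyRange 0 ((nno space : Nat) : Int) 1) k = k := by
        rw [rootP]
        rw [dif_neg (by rw [parent0_getD _ k hk]; omega)]
      rw [this]
      exact Relation.ReflTransGen.refl
    · intro k m hk hm hc
      rw [connL_nil hc]
  have := uf_fold (edgesL space) [] _ hinit edgesL_bounds
  simpa [parentB] using this

theorem rho_le (space : PVMat) (k : Nat) : rho space k ≤ k := rootP_le _ k

theorem rho_lt {space : PVMat} {k : Nat} (hk : k < nno space) : rho space k < nno space :=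
  lt_of_le_of_lt (rho_le space k) hk

theorem rho_idem {space : PVMat} {k : Nat} (hk : k < nno space) :
    rho space (rho space k) = rho space k :=
  rootP_rootP (uf_main space).1 k hk

theorem conn_rho {space : PVMat} {k : Nat} (hk : k < nno space) :
    ConnS space k (rho space k) := (uf_main space).2.1 k hk

theorem conn_iff_rho {space : PVMat} {k m : Nat} (hk : k < nno space) (hm : m < nno space) :
    ConnS space k m ↔ rho space k = rho space m := by
  constructor
  · exact (uf_main space).2.2 k m hk hm
  · intro he
    exact (conn_rho hk).trans (he ▸ connL_symm (conn_rho hm))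

theorem val_conn {space : PVMat} {a b : Nat} (h : ConnS space a b) :
    valF space a = valF space b := by
  induction h with
  | refl => rfl
  | tail _ hstep ih =>
    rcases hstep with hmem | hmem
    · exact ih.trans (mem_edgesL.1 hmem).2.1
    · exact ih.trans (mem_edgesL.1 hmem).2.1.symm


-- ---- flat-index arithmetic ----

theorem cpos {space : PVMat} {k : Nat} (hk : k < nno space) : 0 < Cn space ∧ 0 < Rn space := by
  have hC : Cn space ≠ 0 := by
    intro h
    rw [nno, h, Nat.mul_zero] at hk
    omega
  have hR : Rn space ≠ 0 := by
    intro h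
    rw [nno, h, Nat.zero_mul] at hk
    omega
  exact ⟨Nat.pos_of_ne_zero hC, Nat.pos_of_ne_zero hR⟩

theorem flat_mk_div {C i j : Nat} (hj : j < C) : (i * C + j) / C = i := by
  have hC : 0 < C := by omega
  rw [Nat.add_comm, Nat.add_mul_div_right _ _ hC, Nat.div_eq_of_lt hj]
  omega

theorem flat_mk_mod {C i j : Nat} (hj : j < C) : (i * C + j) % C = j := by
  rw [Nat.add_comm, Nat.add_mul_mod_self_right, Nat.mod_eq_of_lt hj]

theorem flat_unique {C i1 j1 i2 j2 : Nat} (h1 : j1 < C) (h2 : j2 < C)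
    (he : i1 * C + j1 = i2 * C + j2) : i1 = i2 ∧ j1 = j2 := by
  have d1 := flat_mk_div (i := i1) h1
  have d2 := flat_mk_div (i := i2) h2
  have m1 := flat_mk_mod (i := i1) h1
  have m2 := flat_mk_mod (i := i2) h2
  rw [he] at d1 m1
  omega

theorem flat_decomp {space : PVMat} {k : Nat} (hk : k < nno space) :
    k = (k / Cn space) * Cn space + k % Cn space ∧
    k / Cn space < Rn space ∧ k % Cn space < Cn space := by
  have hC := (cpos hk).1
  refine ⟨by rw [Nat.div_add_mod'], ?_, Nat.mod_lt _ hC⟩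
  rw [Nat.div_lt_iff_lt_mul hC]
  exact lt_of_lt_of_le hk (le_of_eq (by rw [nno]))

theorem flat_mk_lt {space : PVMat} {i j : Nat} (hi : i < Rn space) (hj : j < Cn space) :
    i * Cn space + j < nno space := by
  rw [nno]
  calc i * Cn space + j < i * Cn space + Cn space := by omega
    _ = (i + 1) * Cn space := by ring
    _ ≤ Rn space * Cn space := Nat.mul_le_mul_right _ (by omega)

theorem cellOf_mk {space : PVMat} {i j : Nat} (hj : j < Cn space) :
    cellOf space (i * Cn space + j) = ((i : Int), (j : Int)) := by
  rw [cellOf, flat_mk_div hj, flat_mk_mod hj]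

theorem cellOf_inj {space : PVMat} {k m : Nat} (hk : k < nno space) (hm : m < nno space)
    (h : cellOf space k = cellOf space m) : k = m := by
  obtain ⟨hk1, _, hkj⟩ := flat_decomp hk
  obtain ⟨hm1, _, hmj⟩ := flat_decomp hm
  rw [cellOf, cellOf] at h
  simp only [Prod.ext_iff, Int.natCast_inj] at h
  rw [hk1, hm1, h.1, h.2]

-- ---- adjacency: SymCl of the edge list is exactly grid adjacency with equal values ----

theorem adj_char {space : PVMat} {i j i' j' : Nat} (hi : i < Rn space) (hj : j < Cn space)
    (hi' : i' < Rn space) (hj' : j' < Cn space) :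
    SymCl (edgesL space) (i * Cn space + j) (i' * Cn space + j') ↔
      (valF space (i * Cn space + j) = valF space (i' * Cn space + j') ∧
       ((i = i' + 1 ∧ j = j') ∨ (i' = i ∧ j' = j + 1) ∨
        (i' = i + 1 ∧ j' = j) ∨ (i' = i ∧ j = j' + 1))) := by
  have hC : 0 < Cn space := by omega
  constructor
  · rintro (he | he) <;> obtain ⟨ha, hv, hc⟩ := mem_edgesL.1 he
    · rcases hc with ⟨hq, hmod⟩ | ⟨hq, _⟩
      · -- q = m + 1, same row
        have hjlt : j + 1 < Cn space := by
          by_contra hcon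
          apply hmod
          have hmul : (i + 1) * Cn space = i * Cn space + Cn space := by ring
          have h0 : i * Cn space + j + 1 = (i + 1) * Cn space + 0 := by omega
          rw [h0, flat_mk_mod hC]
        have he2 : i * Cn space + (j + 1) = i' * Cn space + j' := by omega
        obtain ⟨e1, e2⟩ := flat_unique hjlt hj' he2
        exact ⟨hv, Or.inr (Or.inl ⟨e1.symm, e2.symm⟩)⟩
      · -- q = m + C
        have hmul : (i + 1) * Cn space = i * Cn space + Cn space := by ring
        have he2 : (i + 1) * Cn space + j = i' * Cn space + j' := by omega
        obtain ⟨e1, e2⟩ := flat_unique hj hj' he2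
        exact ⟨hv, Or.inr (Or.inr (Or.inl ⟨e1.symm, e2.symm⟩))⟩
    · rcases hc with ⟨hq, hmod⟩ | ⟨hq, _⟩
      · -- m = q + 1, same row
        have hjlt : j' + 1 < Cn space := by
          by_contra hcon
          apply hmod
          have hmul : (i' + 1) * Cn space = i' * Cn space + Cn space := by ring
          have h0 : i' * Cn space + j' + 1 = (i' + 1) * Cn space + 0 := by omega
          rw [h0, flat_mk_mod hC]
        have he2 : i' * Cn space + (j' + 1) = i * Cn space + j := by omega
        obtain ⟨e1, e2⟩ := flat_unique hjlt hj he2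
        exact ⟨hv.symm, Or.inr (Or.inr (Or.inr ⟨e1, e2.symm⟩))⟩
      · -- m = q + C
        have hmul : (i' + 1) * Cn space = i' * Cn space + Cn space := by ring
        have he2 : (i' + 1) * Cn space + j' = i * Cn space + j := by omega
        obtain ⟨e1, e2⟩ := flat_unique hj' hj he2
        exact ⟨hv.symm, Or.inl ⟨e1.symm, e2.symm⟩⟩
  · rintro ⟨hv, ⟨e1, e2⟩ | ⟨e1, e2⟩ | ⟨e1, e2⟩ | ⟨e1, e2⟩⟩
    · -- i = i' + 1, j = j' : (q, m) is a down edge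
      refine Or.inr (mem_edgesL.2 ⟨flat_mk_lt hi' hj', hv.symm, Or.inr ⟨?_, ?_⟩⟩)
      · rw [e1, e2]; ring
      · rw [show i' * Cn space + j' + Cn space = (i' + 1) * Cn space + j' by ring, ← e1, ← e2]
        exact flat_mk_lt hi hj
    · -- i' = i, j' = j + 1 : (m, q) is a right edge
      refine Or.inl (mem_edgesL.2 ⟨flat_mk_lt hi hj, hv, Or.inl ⟨?_, ?_⟩⟩)
      · rw [e1, e2]; omega
      · rw [show i * Cn space + j + 1 = i * Cn space + (j + 1) by omega,
            flat_mk_mod (by omega : j + 1 < Cn space)]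
        omega
    · -- i' = i + 1, j' = j : (m, q) is a down edge
      refine Or.inl (mem_edgesL.2 ⟨flat_mk_lt hi hj, hv, Or.inr ⟨?_, ?_⟩⟩)
      · rw [e1, e2]; ring
      · rw [show i * Cn space + j + Cn space = (i + 1) * Cn space + j by ring, ← e1, ← e2]
        exact flat_mk_lt hi' hj'
    · -- i' = i, j = j' + 1 : (q, m) is a right edge
      refine Or.inr (mem_edgesL.2 ⟨flat_mk_lt hi' hj', hv.symm, Or.inl ⟨?_, ?_⟩⟩)
      · rw [e1, e2]; omega
      · rw [show i' * Cn space + j' + 1 = i' * Cn space + (j' + 1) by omega,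
            flat_mk_mod (by omega : j' + 1 < Cn space)]
        omega

theorem nbrs_char {i j i' j' : Nat} :
    (((i' : Int), (j' : Int)) : PVCell) ∈ nbrs (i : Int) (j : Int) ↔
      ((i = i' + 1 ∧ j = j') ∨ (i' = i ∧ j' = j + 1) ∨
       (i' = i + 1 ∧ j' = j) ∨ (i' = i ∧ j = j' + 1)) := by
  simp only [nbrs, List.mem_cons, List.mem_singleton, List.not_mem_nil, or_false, Prod.ext_iff]
  omega


-- ---- BFS correctness: A's per-seed loop marks exactly the seed's component ----

def flatOf (space : PVMat) (p : PVCell) : Nat := p.1.toNat * Cn space + p.2.toNat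

theorem flatOf_cellOf {space : PVMat} {q : Nat} (hq : q < nno space) :
    flatOf space (cellOf space q) = q := by
  obtain ⟨h1, _, _⟩ := flat_decomp hq
  rw [cellOf, flatOf]
  simp only [Int.toNat_natCast]
  omega

theorem symCl_lt {space : PVMat} {a b : Nat} (h : SymCl (edgesL space) a b) :
    a < nno space ∧ b < nno space := by
  rcases h with h | h
  · exact edgesL_bounds _ h
  · exact ⟨(edgesL_bounds _ h).2, (edgesL_bounds _ h).1⟩

def BInv (space : PVMat) (t : Nat) (idx : Int) (v0 : PVMat)
    (X wl : List Nat) (v : PVMat) (c : Int) : Prop :=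
  X.Nodup ∧ (∀ m ∈ X, m < nno space ∧ ConnS space t m) ∧ t ∈ X ∧
  wl.Nodup ∧ (∀ m ∈ wl, m ∈ X) ∧
  VDim v (Rn space) (Cn space) ∧
  (∀ k, k < nno space → mget v (cellOf space k).1 (cellOf space k).2 =
      if k ∈ X then idx else mget v0 (cellOf space k).1 (cellOf space k).2) ∧
  c + (wl.length : Int) = (X.length : Int) ∧
  (∀ m ∈ X, m ∉ wl → ∀ q, q < nno space → SymCl (edgesL space) m q → q ∈ X)

-- characterization of one qc test made by the scan around a cell m of the component
theorem qc_char {space : PVMat} {t m : Nat} {idx : Int} {v0 : PVMat} {X : List Nat} {v : PVMat}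
    (hidx : idx ≠ 0)
    (hzero : ∀ k, k < nno space → ConnS space t k →
      mget v0 (cellOf space k).1 (cellOf space k).2 = 0)
    (hmarks : ∀ k, k < nno space → mget v (cellOf space k).1 (cellOf space k).2 =
      if k ∈ X then idx else mget v0 (cellOf space k).1 (cellOf space k).2)
    (hm : m < nno space) (hconnm : ConnS space t m)
    (p : PVCell) (hp : p ∈ nbrs (cellOf space m).1 (cellOf space m).2) :
    qc space (valF space t) (Rn space) (Cn space) v p = true ↔
      ∃ q, q < nno space ∧ cellOf space q = p ∧ SymCl (edgesL space) m q ∧ q ∉ X := by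
  obtain ⟨hmd, hmi, hmj⟩ := flat_decomp hm
  obtain ⟨p1, p2⟩ := p
  constructor
  · intro hqc
    obtain ⟨hb1, hb2, hb3, hb4, hv0, hnum⟩ := qc_true_iff.1 hqc
    simp only at hb1 hb2 hb3 hb4 hv0 hnum
    have hpe : (p1, p2) = (((p1.toNat : Nat) : Int), ((p2.toNat : Nat) : Int)) := by
      simp only [Prod.mk.injEq]
      omega
    have hi'R : p1.toNat < Rn space := by omega
    have hj'C : p2.toNat < Cn space := by omega
    refine ⟨p1.toNat * Cn space + p2.toNat, flat_mk_lt hi'R hj'C,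
      by rw [cellOf_mk hj'C, hpe], ?_, ?_⟩
    · -- adjacency
      have hnb : ((((p1.toNat : Nat) : Int), ((p2.toNat : Nat) : Int)) : PVCell) ∈
          nbrs ((m / Cn space : Nat) : Int) ((m % Cn space : Nat) : Int) := hpe ▸ hp
      have hpos := nbrs_char.1 hnb
      rw [show m = m / Cn space * Cn space + m % Cn space from hmd] at hconnm ⊢
      rw [adj_char hmi hmj hi'R hj'C]
      refine ⟨?_, hpos⟩
      have h1 : valF space (m / Cn space * Cn space + m % Cn space) = valF space t :=
        (val_conn hconnm).symm
      have h2 : valF space (p1.toNat * Cn space + p2.toNat) = valF space t := by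
        rw [valF, flat_mk_div hj'C, flat_mk_mod hj'C]
        show mget space ((p1.toNat : Nat) : Int) ((p2.toNat : Nat) : Int) = valF space t
        rw [show ((p1.toNat : Nat) : Int) = p1 by omega, show ((p2.toNat : Nat) : Int) = p2 by omega]
        exact hnum
      rw [h1, h2]
    · -- not yet marked
      intro hmem
      have hq' : p1.toNat * Cn space + p2.toNat < nno space := flat_mk_lt hi'R hj'C
      have hx := hmarks _ hq'
      rw [cellOf_mk hj'C] at hx
      simp only at hx
      rw [show ((p1.toNat : Nat) : Int) = p1 by omega,
          show ((p2.toNat : Nat) : Int) = p2 by omega] at hx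
      rw [hx, if_pos hmem] at hv0
      exact hidx hv0
  · rintro ⟨q, hq, hcq, hadj, hqX⟩
    obtain ⟨hqd, hqi, hqj⟩ := flat_decomp hq
    have hconnq : ConnS space t q := hconnm.tail hadj
    rw [qc_true_iff]
    have hc1 : ((q / Cn space : Nat) : Int) = p1 := by
      have := congrArg Prod.fst hcq
      simpa [cellOf] using this
    have hc2 : ((q % Cn space : Nat) : Int) = p2 := by
      have := congrArg Prod.snd hcq
      simpa [cellOf] using this
    have hp1 : (0 : Int) ≤ p1 := by rw [← hc1]; positivity
    have hp2 : (0 : Int) ≤ p2 := by rw [← hc2]; positivity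
    refine ⟨show (0 : Int) ≤ p1 by omega,
            show p1 < ((Rn space : Nat) : Int) by rw [← hc1]; exact_mod_cast hqi,
            show (0 : Int) ≤ p2 by omega,
            show p2 < ((Cn space : Nat) : Int) by rw [← hc2]; exact_mod_cast hqj, ?_, ?_⟩
    · show mget v p1 p2 = 0
      have hx := hmarks q hq
      rw [hcq] at hx
      simp only at hx
      rw [hx, if_neg hqX]
      have hz := hzero q hq hconnq
      rw [hcq] at hz
      exact hz
    · show mget space p1 p2 = valF space t
      have : mget space (cellOf space q).1 (cellOf space q).2 = valF space t :=
        (val_conn hconnq).symm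
      rw [hcq] at this
      exact this

-- the list of newly discovered cells of one expansion, in scan order, in flat form
theorem filterQ_flat {space : PVMat} {t m : Nat} {idx : Int} {v0 : PVMat} {X : List Nat}
    {v : PVMat} (hidx : idx ≠ 0)
    (hzero : ∀ k, k < nno space → ConnS space t k →
      mget v0 (cellOf space k).1 (cellOf space k).2 = 0)
    (hmarks : ∀ k, k < nno space → mget v (cellOf space k).1 (cellOf space k).2 =
      if k ∈ X then idx else mget v0 (cellOf space k).1 (cellOf space k).2)
    (hm : m < nno space) (hconnm : ConnS space t m) :
    ∃ fl : List Nat,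
      filterQ space (valF space t) (Rn space) (Cn space) v
        (cellOf space m).1 (cellOf space m).2 = fl.map (cellOf space) ∧
      fl.Nodup ∧
      (∀ q, q ∈ fl ↔ (q < nno space ∧ SymCl (edgesL space) m q ∧ q ∉ X)) := by
  set FL := filterQ space (valF space t) (Rn space) (Cn space) v
    (cellOf space m).1 (cellOf space m).2 with hFL
  have hid : ∀ p ∈ FL, (cellOf space ∘ flatOf space) p = p := by
    intro p hpF
    have hqc := filterQ_qc p hpF
    have hpn : p ∈ nbrs (cellOf space m).1 (cellOf space m).2 := (List.mem_filter.1 hpF).1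
    obtain ⟨q, hq, hcq, _, _⟩ := (qc_char hidx hzero hmarks hm hconnm p hpn).1 hqc
    simp only [Function.comp_apply]
    rw [← hcq, flatOf_cellOf hq]
  have hmapeq : (FL.map (flatOf space)).map (cellOf space) = FL := by
    rw [List.map_map]
    exact (List.map_congr_left hid).trans (List.map_id FL)
  refine ⟨FL.map (flatOf space), hmapeq.symm,
    List.Nodup.of_map _ (by rw [hmapeq]; exact filterQ_nodup _ _ _ _ _ _ _), ?_⟩
  intro q
  constructor
  · intro hqf
    obtain ⟨p, hpF, hfo⟩ := List.mem_map.1 hqf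
    have hqc := filterQ_qc p hpF
    have hpn : p ∈ nbrs (cellOf space m).1 (cellOf space m).2 := (List.mem_filter.1 hpF).1
    obtain ⟨q', hq', hcq, hadj, hqX⟩ := (qc_char hidx hzero hmarks hm hconnm p hpn).1 hqc
    have : q = q' := by rw [← hfo, ← hcq, flatOf_cellOf hq']
    subst this
    exact ⟨hq', hadj, hqX⟩
  · rintro ⟨hq, hadj, hqX⟩
    obtain ⟨hmd, hmi, hmj⟩ := flat_decomp hm
    obtain ⟨hqd, hqi, hqj⟩ := flat_decomp hq
    have hadj2 : SymCl (edgesL space)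
        (m / Cn space * Cn space + m % Cn space)
        (q / Cn space * Cn space + q % Cn space) := by
      rw [← hmd, ← hqd]; exact hadj
    have hpos := (adj_char hmi hmj hqi hqj).1 hadj2
    have hpn : cellOf space q ∈ nbrs (cellOf space m).1 (cellOf space m).2 := by
      show (((q / Cn space : Nat) : Int), ((q % Cn space : Nat) : Int)) ∈
        nbrs ((m / Cn space : Nat) : Int) ((m % Cn space : Nat) : Int)
      exact nbrs_char.2 hpos.2
    have hqc : qc space (valF space t) (Rn space) (Cn space) v (cellOf space q) = true :=
      (qc_char hidx hzero hmarks hm hconnm _ hpn).2 ⟨q, hq, rfl, hadj, hqX⟩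
    apply List.mem_map.2
    refine ⟨cellOf space q, ?_, flatOf_cellOf hq⟩
    rw [hFL, filterQ]
    exact List.mem_filter.2 ⟨hpn, hqc⟩

theorem conn_closed {space : PVMat} {X : List Nat} {t : Nat} (htX : t ∈ X)
    (hclose : ∀ m ∈ X, ∀ q, q < nno space → SymCl (edgesL space) m q → q ∈ X) :
    ∀ k, ConnS space t k → k ∈ X := by
  intro k h
  induction h with
  | refl => exact htX
  | tail _ hstep ih => exact hclose _ ih _ (symCl_lt hstep).2 hstep

theorem runF?_cons (sp : PVMat) (num idx : Int) (R C : Nat) (g : Nat) (p : PVCell)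
    (w : List PVCell) (v : PVMat) (c : Int) :
    runF? sp num idx R C (g + 1) (p :: w) v c =
      runF? sp num idx R C g (w ++ filterQ sp num R C v p.1 p.2)
        (markAll idx v (filterQ sp num R C v p.1 p.2)) (c + 1) := by
  obtain ⟨x, y⟩ := p
  rfl

theorem runF_correct {space : PVMat} {t : Nat} {idx : Int} {v0 : PVMat}
    (ht : t < nno space) (hroot : rho space t = t) (hidx : idx ≠ 0)
    (hzero : ∀ k, k < nno space → ConnS space t k →
      mget v0 (cellOf space k).1 (cellOf space k).2 = 0) :
    ∀ (f : Nat) (X wl : List Nat) (v : PVMat) (c : Int) (r : PVMat × Int),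
      BInv space t idx v0 X wl v c →
      runF? space (valF space t) idx (Rn space) (Cn space) f
        (wl.map (cellOf space)) v c = some r →
      (VDim r.1 (Rn space) (Cn space) ∧
       (∀ k, k < nno space → mget r.1 (cellOf space k).1 (cellOf space k).2 =
          if rho space k = t then idx
          else mget v0 (cellOf space k).1 (cellOf space k).2) ∧
       r.2 = (((List.range (nno space)).countP (fun m => rho space m == t) : Nat) : Int)) := by
  intro f
  induction f with
  | zero =>
    intro X wl v c r hinv hrun
    cases wl with
    | cons m rest => simp [runF?] at hrun
    | nil =>
      simp only [List.map_nil, runF?, Option.some.injEq] at hrun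
      obtain ⟨hXnd, hXmem, htX, hwnd, hwX, hdim, hmarks, hcnt, hclose⟩ := hinv
      have hXiff : ∀ k, k < nno space → (k ∈ X ↔ rho space k = t) := by
        intro k hk
        constructor
        · intro hkX
          have hconn := (hXmem k hkX).2
          rw [← hroot]
          exact ((conn_iff_rho ht hk).1 hconn).symm
        · intro hr
          have hconn : ConnS space t k := by
            rw [conn_iff_rho ht hk, hroot, hr]
          exact conn_closed htX
            (fun m hmX q hq hsym => hclose m hmX (fun hz => (List.not_mem_nil).elim hz) q hq hsym)
            k hconn
      rw [← hrun]
      refine ⟨hdim, ?_, ?_⟩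
      · intro k hk
        rw [hmarks k hk]
        by_cases hkX : k ∈ X
        · rw [if_pos hkX, if_pos ((hXiff k hk).1 hkX)]
        · rw [if_neg hkX, if_neg (fun hh => hkX ((hXiff k hk).2 hh))]
      · have hperm : X.Perm ((List.range (nno space)).filter (fun m => rho space m == t)) := by
          rw [List.perm_ext_iff_of_nodup hXnd (List.nodup_range.filter _)]
          intro a
          rw [List.mem_filter, List.mem_range]
          constructor
          · intro ha
            exact ⟨(hXmem a ha).1, by simpa using (hXiff a (hXmem a ha).1).1 ha⟩
          · rintro ⟨ha, hr⟩
            exact (hXiff a ha).2 (by simpa using hr)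
        rw [List.countP_eq_length_filter, ← hperm.length_eq]
        simp only [List.length_nil, Nat.cast_zero, add_zero] at hcnt
        omega
  | succ g ih =>
    intro X wl v c r hinv hrun
    cases wl with
    | nil =>
      exact ih X [] v c r hinv (by simpa [runF?] using hrun)
    | cons m rest =>
      obtain ⟨hXnd, hXmem, htX, hwnd, hwX, hdim, hmarks, hcnt, hclose⟩ := hinv
      have hm := (hXmem m (hwX m (by simp))).1
      have hconnm := (hXmem m (hwX m (by simp))).2
      obtain ⟨fl, hFLeq, hflnd, hflmem⟩ :=
        filterQ_flat (t := t) (v0 := v0) (X := X) (v := v) hidx hzero hmarks hm hconnm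
      have hflX : ∀ q ∈ fl, q ∉ X := fun q hq => ((hflmem q).1 hq).2.2
      have hfln : ∀ q ∈ fl, q < nno space := fun q hq => ((hflmem q).1 hq).1
      have hflconn : ∀ q ∈ fl, ConnS space t q := fun q hq =>
        hconnm.tail ((hflmem q).1 hq).2.1
      have hrun' : runF? space (valF space t) idx (Rn space) (Cn space) g
          ((rest ++ fl).map (cellOf space))
          (markAll idx v
            (filterQ space (valF space t) (Rn space) (Cn space) v
              (cellOf space m).1 (cellOf space m).2)) (c + 1) = some r := by
        rw [List.map_cons, runF?_cons] at hrun
        rw [List.map_append, ← hFLeq]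
        exact hrun
      -- the new invariant
      have hdim' : VDim (markAll idx v
          (filterQ space (valF space t) (Rn space) (Cn space) v
            (cellOf space m).1 (cellOf space m).2)) (Rn space) (Cn space) :=
        VDim_markAll_filterQ _ _ _ hdim
      have hmemFL : ∀ k, k < nno space →
          (((cellOf space k).1, (cellOf space k).2) ∈
            filterQ space (valF space t) (Rn space) (Cn space) v
              (cellOf space m).1 (cellOf space m).2 ↔ k ∈ fl) := by
        intro k hk
        rw [hFLeq]
        constructor
        · intro hmem
          obtain ⟨q, hqfl, hcq⟩ := List.mem_map.1 hmem
          have : q = k := cellOf_inj (hfln q hqfl) hk (by rw [hcq])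
          exact this ▸ hqfl
        · intro hkfl
          exact List.mem_map.2 ⟨k, hkfl, rfl⟩
      have hmarks' : ∀ k, k < nno space →
          mget (markAll idx v
            (filterQ space (valF space t) (Rn space) (Cn space) v
              (cellOf space m).1 (cellOf space m).2))
            (cellOf space k).1 (cellOf space k).2 =
          if k ∈ X ++ fl then idx
          else mget v0 (cellOf space k).1 (cellOf space k).2 := by
        intro k hk
        have h1 := mget_markAll (sp := space) (num := valF space t) (idx := idx)
          (filterQ space (valF space t) (Rn space) (Cn space) v
            (cellOf space m).1 (cellOf space m).2) v hdim
          (fun p hp => Or.inl (filterQ_qc p hp))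
          (cellOf space k).1 (cellOf space k).2
          (Int.natCast_nonneg _) (Int.natCast_nonneg _)
        rw [h1]
        by_cases hkfl : k ∈ fl
        · rw [if_pos ((hmemFL k hk).2 hkfl), if_pos (List.mem_append.2 (Or.inr hkfl))]
        · rw [if_neg (fun hh => hkfl ((hmemFL k hk).1 hh)), hmarks k hk]
          by_cases hkX : k ∈ X
          · rw [if_pos hkX, if_pos (List.mem_append.2 (Or.inl hkX))]
          · rw [if_neg hkX, if_neg (by
              intro hh
              rcases List.mem_append.1 hh with hh | hh
              · exact hkX hh
              · exact hkfl hh)]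
      have hinv' : BInv space t idx v0 (X ++ fl) (rest ++ fl)
          (markAll idx v
            (filterQ space (valF space t) (Rn space) (Cn space) v
              (cellOf space m).1 (cellOf space m).2)) (c + 1) := by
        refine ⟨?_, ?_, List.mem_append.2 (Or.inl htX), ?_, ?_, hdim', hmarks', ?_, ?_⟩
        · rw [List.nodup_append]
          exact ⟨hXnd, hflnd, fun a ha b hb hab => hflX b hb (hab ▸ ha)⟩
        · intro a ha
          rcases List.mem_append.1 ha with ha | ha
          · exact hXmem a ha
          · exact ⟨hfln a ha, hflconn a ha⟩
        · rw [List.nodup_append]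
          refine ⟨(List.nodup_cons.1 hwnd).2, hflnd, ?_⟩
          intro a ha b hb hab
          exact hflX b hb (hab ▸ hwX a (by simp [ha]))
        · intro a ha
          rcases List.mem_append.1 ha with ha | ha
          · exact List.mem_append.2 (Or.inl (hwX a (by simp [ha])))
          · exact List.mem_append.2 (Or.inr ha)
        · simp only [List.length_cons] at hcnt
          simp only [List.length_append]
          push_cast at hcnt ⊢
          omega
        · intro m' hm' hnw q hq hsym
          rcases List.mem_append.1 hm' with hm'X | hm'fl
          · by_cases hmm : m' = m
            · subst hmm
              by_cases hqX : q ∈ X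
              · exact List.mem_append.2 (Or.inl hqX)
              · exact List.mem_append.2 (Or.inr ((hflmem q).2 ⟨hq, hsym, hqX⟩))
            · have hnold : m' ∉ m :: rest := by
                intro hcon
                rcases List.mem_cons.1 hcon with h | h
                · exact hmm h
                · exact hnw (List.mem_append.2 (Or.inl h))
              exact List.mem_append.2 (Or.inl (hclose m' hm'X hnold q hq hsym))
          · exact absurd (List.mem_append.2 (Or.inr hm'fl)) hnw
      exact ih (X ++ fl) (rest ++ fl) _ _ r hinv' hrun'


-- ---- pvBfs: one call of A's bfs marks exactly the component of the seed ----

theorem pvBfs_spec {space : PVMat} {t : Nat} {idx : Int} {v0 : PVMat}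
    (ht : t < nno space) (hroot : rho space t = t) (hidx : idx ≠ 0)
    (hdim0 : VDim v0 (Rn space) (Cn space))
    (hzero : ∀ k, k < nno space → ConnS space t k →
      mget v0 (cellOf space k).1 (cellOf space k).2 = 0) :
    VDim (pvBfs space v0 (cellOf space t).1 (cellOf space t).2 idx (nno space + 1)).1
      (Rn space) (Cn space) ∧
    (∀ k, k < nno space →
      mget (pvBfs space v0 (cellOf space t).1 (cellOf space t).2 idx (nno space + 1)).1
        (cellOf space k).1 (cellOf space k).2 =
      if rho space k = t then idx else mget v0 (cellOf space k).1 (cellOf space k).2) ∧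
    (pvBfs space v0 (cellOf space t).1 (cellOf space t).2 idx (nno space + 1)).2 =
      ((szN space t : Nat) : Int) := by
  obtain ⟨htd, hti, htj⟩ := flat_decomp ht
  have hc1 : (0 : Int) ≤ (cellOf space t).1 := Int.natCast_nonneg _
  have hc2 : (0 : Int) ≤ (cellOf space t).2 := Int.natCast_nonneg _
  have hc1R : (cellOf space t).1 < ((Rn space : Nat) : Int) := by
    show ((t / Cn space : Nat) : Int) < _
    exact_mod_cast hti
  have hc2C : (cellOf space t).2 < ((Cn space : Nat) : Int) := by
    show ((t % Cn space : Nat) : Int) < _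
    exact_mod_cast htj
  have h0 : mget v0 (cellOf space t).1 (cellOf space t).2 = 0 :=
    hzero t ht Relation.ReflTransGen.refl
  set v1 := mset v0 (cellOf space t).1 (cellOf space t).2 idx with hv1
  have hdim1 : VDim v1 (Rn space) (Cn space) := VDim_mset hdim0 _ _ _ hc1 hc2
  have hU1 : U v1 + 1 = U v0 := U_mset hdim0 _ _ idx hc1 hc1R hc2 hc2C h0 hidx
  have hU0 : U v0 ≤ Rn space * Cn space := by
    have := U_le v0 hdim0.2
    rw [hdim0.1] at this
    exact this
  have hsome := runF?_isSome (sp := space) (num := valF space t) hidx (nno space + 1)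
    [((cellOf space t).1, (cellOf space t).2)] v1 0 hdim1
    (by simp only [List.length_cons, List.length_nil]; rw [nno]; omega)
  obtain ⟨r, hr⟩ := Option.isSome_iff_exists.1 hsome
  have hBinv : BInv space t idx v0 [t] [t] v1 0 := by
    refine ⟨List.nodup_singleton t, ?_, by simp, List.nodup_singleton t, by simp, hdim1, ?_, by simp, ?_⟩
    · intro a ha
      rw [List.mem_singleton] at ha
      subst ha
      exact ⟨ht, Relation.ReflTransGen.refl⟩
    · intro k hk
      by_cases hkt : k = t
      · subst hkt
        rw [if_pos (List.mem_singleton.2 rfl)]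
        exact mget_mset_self hdim0 _ _ idx hc1 hc1R hc2 hc2C
      · rw [if_neg (fun hh => hkt (List.mem_singleton.1 hh))]
        apply mget_mset_ne _ _ _ _ _ hc1 hc2 (Int.natCast_nonneg _) (Int.natCast_nonneg _)
        intro hco
        exact hkt (cellOf_inj hk ht (Prod.ext_iff.2 ⟨hco.1.symm, hco.2.symm⟩))
    · intro a ha hna
      exact absurd (List.mem_singleton.2 (List.mem_singleton.1 ha)) hna
  have hwl : ([t].map (cellOf space)) = [((cellOf space t).1, (cellOf space t).2)] := by
    simp
  have hconc := runF_correct ht hroot hidx hzero (nno space + 1) [t] [t] v1 0 r hBinv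
    (by rw [hwl]; exact hr)
  have hloop : pvBfs space v0 (cellOf space t).1 (cellOf space t).2 idx (nno space + 1) = r := by
    show bfsLoop space (mget space (cellOf space t).1 (cellOf space t).2) idx
      ((space.length : Nat) : Int) (((space.headD []).length : Nat) : Int) (nno space + 1)
      [((cellOf space t).1, (cellOf space t).2)] v1 0 = r
    have hnum : mget space (cellOf space t).1 (cellOf space t).2 = valF space t := rfl
    rw [hnum]
    exact bfsLoop_eq (R := Rn space) (C := Cn space) (nno space + 1) _ v1 0 r hdim1 hr
  rw [hloop]
  exact ⟨hconc.1, hconc.2.1, hconc.2.2⟩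

-- ---- A's outer double loop, re-expressed over explicit (i, j) pairs ----

def bodyA (space : PVMat) (st : PVMat × Int × List Int × Int) (p : PVCell) :
    PVMat × Int × List Int × Int :=
  if mget st.1 p.1 p.2 = 0 then
    let r := pvBfs space st.1 p.1 p.2 st.2.2.2 (space.length * (space.headD []).length + 1)
    ((r.1),
     (if 3 ≤ r.2 then st.2.1 + r.2 else st.2.1),
     (if 3 ≤ r.2 then PySem.Set.add st.2.2.1 st.2.2.2 else st.2.2.1),
     st.2.2.2 + 1)
  else st

def pairsRC (R C : Nat) : List PVCell :=
  (List.range R).flatMap (fun (i : Nat) => (List.range C).map (fun (j : Nat) => (((i : Nat) : Int), ((j : Nat) : Int))))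

theorem range_mul_flatMap (R C : Nat) :
    List.range (R * C) = (List.range R).flatMap (fun i => (List.range C).map (fun j => i * C + j)) := by
  induction R with
  | zero => simp
  | succ n ih =>
    have h1 : (n + 1) * C = n * C + C := by ring
    rw [h1, List.range_add, List.range_succ, List.flatMap_append, ih]
    simp

theorem pairsRC_eq (space : PVMat) :
    pairsRC (Rn space) (Cn space) = (List.range (nno space)).map (cellOf space) := by
  rw [pairsRC, nno, range_mul_flatMap, List.map_flatMap]
  apply List.flatMap_congr
  intro i _
  rw [List.map_map]
  apply List.map_congr_left
  intro j hj
  exact (cellOf_mk (List.mem_range.1 hj)).symm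

theorem has_found_eq (space : PVMat) :
    has_found space =
      (space,
        (((pairsRC (Rn space) (Cn space)).foldl (bodyA space)
           (List.replicate (Rn space) (List.replicate (Cn space) 0), 0,
            ([] : List Int), 1))).1,
        (((pairsRC (Rn space) (Cn space)).foldl (bodyA space)
           (List.replicate (Rn space) (List.replicate (Cn space) 0), 0,
            ([] : List Int), 1))).2.2.1,
        (((pairsRC (Rn space) (Cn space)).foldl (bodyA space)
           (List.replicate (Rn space) (List.replicate (Cn space) 0), 0,
            ([] : List Int), 1))).2.1) := by
  have hv0 : ((PySem.List.pyRange 0 ((space.length : Nat) : Int) 1).map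
      (fun _ => (PySem.List.pyRange 0 (((space.headD []).length : Nat) : Int) 1).map (fun _ => (0 : Int))))
      = List.replicate (Rn space) (List.replicate (Cn space) 0) := by
    simp [PySem.List.pyRange_zero_nat, List.map_map, Function.comp_def, List.map_const']
    refine ⟨rfl, Or.inr ?_⟩
    rw [Cn, List.headD_eq_head?_getD]
  have key : ∀ init : PVMat × Int × List Int × Int,
      (PySem.List.pyRange 0 ((space.length : Nat) : Int) 1).foldl (fun st i =>
        (PySem.List.pyRange 0 (((space.headD []).length : Nat) : Int) 1).foldl
          (fun (st : PVMat × Int × List Int × Int) j =>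
            if mget st.1 i j = 0 then
              ((pvBfs space st.1 i j st.2.2.2 (space.length * (space.headD []).length + 1)).1,
               (if 3 ≤ (pvBfs space st.1 i j st.2.2.2
                    (space.length * (space.headD []).length + 1)).2 then
                  st.2.1 + (pvBfs space st.1 i j st.2.2.2
                    (space.length * (space.headD []).length + 1)).2 else st.2.1),
               (if 3 ≤ (pvBfs space st.1 i j st.2.2.2
                    (space.length * (space.headD []).length + 1)).2 then
                  PySem.Set.add st.2.2.1 st.2.2.2 else st.2.2.1),
               st.2.2.2 + 1)
            else st) st) init
      = (pairsRC (Rn space) (Cn space)).foldl (bodyA space) init := by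
    intro init
    rw [pairsRC, List.foldl_flatMap]
    simp only [PySem.List.pyRange_zero_nat, List.foldl_map]
    apply PySem.List.foldl_congr_mem
    intro acc i _
    apply PySem.List.foldl_congr_mem
    intro acc2 j _
    simp only [bodyA]
  simp only [has_found, hv0, key]


-- ---- prefix forms of the canonical count/delete/index data ----

def minsBig (space : PVMat) (t : Nat) : List Nat :=
  (List.range t).filter (fun r => rho space r == r && decide (3 ≤ szN space r))

def cntT (space : PVMat) (t : Nat) : Int :=
  ((minsBig space t).map (fun r => ((szN space r : Nat) : Int))).sum

def delT (space : PVMat) (t : Nat) : List Int :=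
  (minsBig space t).map (fun r => ((labN space r : Nat) : Int))

def idxT (space : PVMat) (t : Nat) : Int :=
  ((1 + (List.range t).countP (fun m => rho space m == m) : Nat) : Int)

theorem labN_lt {space : PVMat} {r t : Nat} (hr : rho space r = r) (hrt : r < t) :
    labN space r < labN space t := by
  have ht : t = (r + 1) + (t - (r + 1)) := by omega
  rw [labN, labN, ht, List.range_add, List.countP_append, List.range_succ, List.countP_append]
  have h1 : List.countP (fun m => rho space m == m) [r] = 1 := by
    simp [List.countP_cons, hr]
  omega

theorem notin_delT {space : PVMat} {t : Nat} (hroot : rho space t = t) :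
    ((labN space t : Nat) : Int) ∉ delT space t := by
  intro hmem
  obtain ⟨r, hr, heq⟩ := List.mem_map.1 hmem
  rw [minsBig, List.mem_filter, List.mem_range] at hr
  have hrr : rho space r = r := by
    have hx := hr.2
    simp only [Bool.and_eq_true, beq_iff_eq, decide_eq_true_eq] at hx
    exact hx.1
  have := labN_lt hrr hr.1
  omega

theorem mget_zero_init (R C : Nat) (a b : Nat) :
    mget (List.replicate R (List.replicate C (0 : Int))) ((a : Nat) : Int) ((b : Nat) : Int) = 0 := by
  rw [mget_nn _ _ _ (Int.natCast_nonneg _) (Int.natCast_nonneg _)]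
  simp only [Int.toNat_natCast, List.getD_eq_getElem?_getD, List.getElem?_replicate]
  by_cases ha : a < R <;> by_cases hb : b < C <;> simp [ha, hb]

def AInv (space : PVMat) (t : Nat) (st : PVMat × Int × List Int × Int) : Prop :=
  VDim st.1 (Rn space) (Cn space) ∧
  (∀ k, k < nno space → mget st.1 (cellOf space k).1 (cellOf space k).2 =
      if rho space k < t then ((labN space (rho space k) : Nat) : Int) else 0) ∧
  st.2.1 = cntT space t ∧ st.2.2.1 = delT space t ∧ st.2.2.2 = idxT space t

theorem AInv_step {space : PVMat} {t : Nat} (ht : t < nno space)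
    {st : PVMat × Int × List Int × Int} (h : AInv space t st) :
    AInv space (t + 1) (bodyA space st (cellOf space t)) := by
  obtain ⟨hdim, hmarks, hcnt, hdel, hidx⟩ := h
  have hrle := rho_le space t
  by_cases hroot : rho space t = t
  · -- new component: the cell is unmarked, bfs fires
    have h0 : mget st.1 (cellOf space t).1 (cellOf space t).2 = 0 := by
      rw [hmarks t ht, if_neg (by omega)]
    have hidxne : idxT space t ≠ 0 := by
      rw [idxT]
      have : (1 : Nat) ≤ 1 + (List.range t).countP (fun m => rho space m == m) := by omega
      omega
    have hzero : ∀ k, k < nno space → ConnS space t k →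
        mget st.1 (cellOf space k).1 (cellOf space k).2 = 0 := by
      intro k hk hconn
      have hrk : rho space k = t := by
        rw [← ((conn_iff_rho ht hk).1 hconn), hroot]
      rw [hmarks k hk, if_neg (by omega)]
    have hspec := pvBfs_spec ht hroot hidxne hdim hzero
    rw [bodyA, if_pos h0]
    have hfuel : space.length * (space.headD []).length + 1 = nno space + 1 := rfl
    rw [hidx, hfuel]
    set r := pvBfs space st.1 (cellOf space t).1 (cellOf space t).2 (idxT space t)
      (nno space + 1) with hrdef
    obtain ⟨hdim', hmarks', hcnt'⟩ := hspec
    have hminsBig : minsBig space (t + 1) =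
        minsBig space t ++ (if 3 ≤ szN space t then [t] else []) := by
      rw [minsBig, minsBig, List.range_succ, List.filter_append]
      congr 1
      by_cases h3 : 3 ≤ szN space t
      · simp [hroot, h3]
      · simp [hroot, h3]
    have h3iff : (3 ≤ r.2) ↔ (3 ≤ szN space t) := by
      rw [hcnt']
      omega
    refine ⟨hdim', ?_, ?_, ?_, ?_⟩
    · intro k hk
      rw [hmarks' k hk]
      by_cases hrk : rho space k = t
      · rw [if_pos hrk, if_pos (by omega)]
        rw [hrk]
        rw [idxT, labN]
      · rw [if_neg hrk, hmarks k hk]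
        by_cases hlt : rho space k < t
        · rw [if_pos hlt, if_pos (by omega)]
        · rw [if_neg hlt, if_neg (by omega)]
    · show (if 3 ≤ r.2 then st.2.1 + r.2 else st.2.1) = cntT space (t + 1)
      rw [cntT, hminsBig, List.map_append, List.sum_append, ← cntT, hcnt]
      by_cases h3 : 3 ≤ szN space t
      · rw [if_pos (h3iff.2 h3), hcnt']
        simp [h3]
      · rw [if_neg (fun hh => h3 (h3iff.1 hh))]
        simp [h3]
    · show (if 3 ≤ r.2 then PySem.Set.add st.2.2.1 (idxT space t) else st.2.2.1) = delT space (t + 1)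
      rw [delT, hminsBig, List.map_append, ← delT]
      by_cases h3 : 3 ≤ szN space t
      · rw [if_pos (h3iff.2 h3), hdel]
        rw [set_add_fresh _ _ (by rw [idxT, ← labN]; exact notin_delT hroot)]
        simp [h3, idxT, labN]
      · rw [if_neg (fun hh => h3 (h3iff.1 hh)), hdel]
        simp [h3]
    · show idxT space t + 1 = idxT space (t + 1)
      rw [idxT, idxT, List.range_succ, List.countP_append]
      have : List.countP (fun m => rho space m == m) [t] = 1 := by
        simp [List.countP_cons, hroot]
      rw [this]
      push_cast
      ring
  · -- already marked: ρ t < t, the cell carries a nonzero label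
    have hlt : rho space t < t := by omega
    have hnz : mget st.1 (cellOf space t).1 (cellOf space t).2 ≠ 0 := by
      rw [hmarks t ht, if_pos hlt]
      have : 1 ≤ labN space (rho space t) := by rw [labN]; omega
      omega
    rw [bodyA, if_neg hnz]
    have hnomin : ∀ k, k < nno space → rho space k ≠ t := by
      intro k hk hcon
      have := rho_idem hk
      rw [hcon] at this
      exact hroot this
    refine ⟨hdim, ?_, ?_, ?_, ?_⟩
    · intro k hk
      rw [hmarks k hk]
      have := hnomin k hk
      by_cases hl : rho space k < t
      · rw [if_pos hl, if_pos (by omega)]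
      · rw [if_neg hl, if_neg (by omega)]
    · rw [hcnt, cntT, cntT, minsBig, minsBig, List.range_succ, List.filter_append]
      have : List.filter (fun r => rho space r == r && decide (3 ≤ szN space r)) [t] = [] := by
        simp [hroot]
      rw [this, List.append_nil]
    · rw [hdel, delT, delT, minsBig, minsBig, List.range_succ, List.filter_append]
      have : List.filter (fun r => rho space r == r && decide (3 ≤ szN space r)) [t] = [] := by
        simp [hroot]
      rw [this, List.append_nil]
    · rw [hidx, idxT, idxT, List.range_succ, List.countP_append]
      have : List.countP (fun m => rho space m == m) [t] = 0 := by
        simp [hroot]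
      rw [this]
      norm_num

theorem AInv_fold (space : PVMat) :
    ∀ t, t ≤ nno space →
      AInv space t (((List.range t).map (cellOf space)).foldl (bodyA space)
        (List.replicate (Rn space) (List.replicate (Cn space) 0), 0, ([] : List Int), 1)) := by
  intro t
  induction t with
  | zero =>
    intro _
    refine ⟨⟨by simp, ?_⟩, ?_, rfl, rfl, rfl⟩
    · intro r hr
      rw [List.eq_of_mem_replicate hr]
      simp
    · intro k hk
      rw [if_neg (by omega)]
      exact mget_zero_init _ _ _ _
  | succ u ih =>
    intro hu
    rw [List.range_succ, List.map_append, List.foldl_append]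
    simp only [List.map_cons, List.map_nil, List.foldl_cons, List.foldl_nil]
    exact AInv_step (by omega) (ih (by omega))

theorem visSpec_dim (space : PVMat) : VDim (visSpec space) (Rn space) (Cn space) := by
  refine ⟨by simp [visSpec], ?_⟩
  intro r hr
  rw [visSpec] at hr
  obtain ⟨i, _, rfl⟩ := List.mem_map.1 hr
  simp

theorem mget_visSpec (space : PVMat) (i j : Nat) (hi : i < Rn space) (hj : j < Cn space) :
    mget (visSpec space) ((i : Nat) : Int) ((j : Nat) : Int) =
      ((labN space (rho space (i * Cn space + j)) : Nat) : Int) := by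
  rw [mget_nn _ _ _ (Int.natCast_nonneg _) (Int.natCast_nonneg _)]
  simp only [Int.toNat_natCast, visSpec, List.getD_eq_getElem?_getD]
  rw [List.getElem?_map,
      List.getElem?_eq_getElem (l := List.range (Rn space)) (by simpa using hi)]
  simp only [List.getElem_range, Option.map_some, Option.getD_some]
  rw [List.getElem?_map,
      List.getElem?_eq_getElem (l := List.range (Cn space)) (by simpa using hj)]
  simp

theorem A_eq (space : PVMat) :
    has_found space = (space, visSpec space, delSpec space, cntSpec space) := by
  rw [has_found_eq, pairsRC_eq]
  obtain ⟨hdim, hmarks, hcnt, hdel, hidx⟩ := AInv_fold space (nno space) (le_refl _)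
  set st := ((List.range (nno space)).map (cellOf space)).foldl (bodyA space)
    (List.replicate (Rn space) (List.replicate (Cn space) 0), 0, ([] : List Int), 1) with hst
  have h1 : st.1 = visSpec space := by
    apply mat_ext hdim (visSpec_dim space)
    intro a b ha hb
    have hk : a * Cn space + b < nno space := flat_mk_lt ha hb
    have := hmarks _ hk
    rw [cellOf_mk hb] at this
    simp only at this
    rw [this, if_pos (lt_of_le_of_lt (rho_le space _) hk), mget_visSpec space a b ha hb]
  have h2 : st.2.2.1 = delSpec space := by
    rw [hdel]
    rfl
  have h3 : st.2.1 = cntSpec space := by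
    rw [hcnt]
    rfl
  rw [h1, h2, h3]


-- ---- B-side assembly: each pass of has_found_alt computes the canonical data ----

def valsL (space : PVMat) : List Int := (List.range (nno space)).map (valF space)

theorem valsL_get {space : PVMat} {k : Nat} (hk : k < nno space) :
    PySem.List.pyGetD (valsL space) ((k : Nat) : Int) 0 = valF space k := by
  rw [PySem.List.pyGetD_natCast, valsL, List.getD_eq_getElem?_getD, List.getElem?_map,
      List.getElem?_eq_getElem (by simpa using hk)]
  simp

theorem valsB_eq (space : PVMat) :
    ((PySem.List.pyRange 0 ((Rn space : Nat) : Int) 1).flatMap (fun i =>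
      (PySem.List.pyRange 0 ((Cn space : Nat) : Int) 1).map (fun j => mget space i j)))
    = valsL space := by
  rw [PySem.List.pyRange_zero_nat, PySem.List.pyRange_zero_nat, List.flatMap_map]
  rw [valsL, nno, range_mul_flatMap, List.map_flatMap]
  apply List.flatMap_congr
  intro i _
  rw [List.map_map, List.map_map]
  apply List.map_congr_left
  intro j hj
  have hjC : j < Cn space := List.mem_range.1 hj
  simp only [Function.comp_apply]
  rw [valF, flat_mk_div hjC, flat_mk_mod hjC]

def rootL (space : PVMat) : List Int :=
  (List.range (nno space)).map (fun k => ((rho space k : Nat) : Int))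

theorem rootL_get {space : PVMat} {k : Nat} (hk : k < nno space) :
    PySem.List.pyGetD (rootL space) ((k : Nat) : Int) 0 = ((rho space k : Nat) : Int) := by
  rw [PySem.List.pyGetD_natCast, rootL, List.getD_eq_getElem?_getD, List.getElem?_map,
      List.getElem?_eq_getElem (by simpa using hk)]
  simp

theorem parentB_len (space : PVMat) : (parentB space).length = nno space :=
  (uf_main space).1.1

-- the union pass of B equals the canonical edge fold
theorem parent_pass_eq (space : PVMat) :
    ((PySem.List.pyRange 0 ((nno space : Nat) : Int) 1).foldl (fun p k =>
      let p1 := if PySem.Int.mod (k + 1) ((Cn space : Nat) : Int) ≠ 0 ∧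
                   PySem.List.pyGetD (valsL space) k 0 = PySem.List.pyGetD (valsL space) (k + 1) 0
                then ufUnion p k (k + 1) else p
      if k + ((Cn space : Nat) : Int) < ((nno space : Nat) : Int) ∧
          PySem.List.pyGetD (valsL space) k 0 =
            PySem.List.pyGetD (valsL space) (k + ((Cn space : Nat) : Int)) 0
      then ufUnion p1 k (k + ((Cn space : Nat) : Int)) else p1)
      (PySem.List.pyRange 0 ((nno space : Nat) : Int) 1))
    = parentB space := by
  rw [parentB, edgesL, List.foldl_flatMap]
  rw [PySem.List.pyRange_zero_nat, List.foldl_map]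
  apply PySem.List.foldl_congr_mem
  intro p k hkmem
  have hk : k < nno space := List.mem_range.1 hkmem
  have hcast1 : ((k : Nat) : Int) + 1 = (((k + 1 : Nat) : Nat) : Int) := by push_cast; ring
  have hcast2 : ((k : Nat) : Int) + ((Cn space : Nat) : Int) = (((k + Cn space : Nat) : Nat) : Int) := by
    push_cast; ring
  have hmod : (PySem.Int.mod (((k : Nat) : Int) + 1) ((Cn space : Nat) : Int) ≠ 0) ↔
      ((k + 1) % Cn space ≠ 0) := by
    rw [hcast1, PySem.Int.mod_natCast]
    exact_mod_cast Iff.rfl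
  have h1 : (if PySem.Int.mod (((k : Nat) : Int) + 1) ((Cn space : Nat) : Int) ≠ 0 ∧
               PySem.List.pyGetD (valsL space) ((k : Nat) : Int) 0 =
                 PySem.List.pyGetD (valsL space) (((k : Nat) : Int) + 1) 0
             then ufUnion p ((k : Nat) : Int) (((k : Nat) : Int) + 1) else p)
      = (if (k + 1) % Cn space ≠ 0 ∧ valF space k = valF space (k + 1)
         then [(k, k + 1)] else []).foldl
          (fun p e => ufUnion p ((e.1 : Nat) : Int) ((e.2 : Nat) : Int)) p := by
    by_cases hm : (k + 1) % Cn space ≠ 0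
    · have hk1 : k + 1 < nno space := right_edge_lt hk hm
      rw [hcast1, valsL_get hk, valsL_get hk1]
      by_cases hv : valF space k = valF space (k + 1)
      · rw [if_pos ⟨by rw [← hcast1]; exact hmod.2 hm, hv⟩, if_pos ⟨hm, hv⟩]
        simp
      · rw [if_neg (fun hh => hv hh.2), if_neg (fun hh => hv hh.2)]
        simp
    · rw [if_neg (fun hh => hm (hmod.1 hh.1)), if_neg (fun hh => hm hh.1)]
      simp
  have h2 : ∀ p1 : List Int,
      (if ((k : Nat) : Int) + ((Cn space : Nat) : Int) < ((nno space : Nat) : Int) ∧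
          PySem.List.pyGetD (valsL space) ((k : Nat) : Int) 0 =
            PySem.List.pyGetD (valsL space) (((k : Nat) : Int) + ((Cn space : Nat) : Int)) 0
       then ufUnion p1 ((k : Nat) : Int) (((k : Nat) : Int) + ((Cn space : Nat) : Int)) else p1)
      = (if k + Cn space < nno space ∧ valF space k = valF space (k + Cn space)
         then [(k, k + Cn space)] else []).foldl
          (fun p e => ufUnion p ((e.1 : Nat) : Int) ((e.2 : Nat) : Int)) p1 := by
    intro p1
    by_cases hlt : k + Cn space < nno space
    · rw [hcast2, valsL_get hk, valsL_get hlt]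
      by_cases hv : valF space k = valF space (k + Cn space)
      · rw [if_pos ⟨by rw [← hcast2]; exact_mod_cast hlt, hv⟩, if_pos ⟨hlt, hv⟩]
        simp
      · rw [if_neg (fun hh => hv hh.2), if_neg (fun hh => hv hh.2)]
        simp
    · rw [if_neg (fun hh => hlt (by exact_mod_cast (hcast2 ▸ hh.1))), if_neg (fun hh => hlt hh.1)]
      simp
  rw [List.foldl_append, ← h1, ← h2]

-- the size pass: a counting dict over the root list
theorem getD_count_fold (xs : List Int) (v : Int) :
    ∀ d : PySem.Dict Int Int,
      (xs.foldl (fun d x => PySem.Dict.insert d x (PySem.Dict.getD d x 0 + 1)) d).getD v 0 =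
        d.getD v 0 + (xs.count v : Int) := by
  induction xs with
  | nil => intro d; simp
  | cons x rest ih =>
    intro d
    rw [List.foldl_cons, ih, PySem.Dict.getD_insert]
    by_cases hv : v = x
    · subst hv
      rw [if_pos rfl, List.count_cons_self]
      push_cast
      ring
    · rw [if_neg hv, List.count_cons_of_ne (fun hh => hv hh.symm)]

theorem count_rootL (space : PVMat) (r : Nat) :
    (rootL space).count ((r : Nat) : Int) = szN space r := by
  rw [rootL, szN, List.count_eq_countP, List.countP_map]
  apply List.countP_congr
  intro m _
  constructor
  · intro h; simp at h ⊢; omega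
  · intro h; simp at h ⊢; omega

theorem szB_eq (space : PVMat) (r : Nat) :
    ((rootL space).foldl (fun d x => PySem.Dict.insert d x (PySem.Dict.getD d x 0 + 1))
      PySem.Dict.empty).getD ((r : Nat) : Int) 0 = ((szN space r : Nat) : Int) := by
  rw [getD_count_fold, count_rootL]
  simp


def sizeD (space : PVMat) : PySem.Dict Int Int :=
  (rootL space).foldl (fun d x => PySem.Dict.insert d x (PySem.Dict.getD d x 0 + 1))
    PySem.Dict.empty

theorem rootMap_eq (space : PVMat) :
    (PySem.List.pyRange 0 ((nno space : Nat) : Int) 1).map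
      (fun k => ufFind (parentB space) (parentB space).length k) = rootL space := by
  rw [PySem.List.pyRange_zero_nat, List.map_map, rootL]
  apply List.map_congr_left
  intro k hk
  have hkn : k < nno space := List.mem_range.1 hk
  simp only [Function.comp_apply]
  rw [ufFind_eq_rootP (uf_main space).1 _ k hkn (by rw [parentB_len]; omega)]
  rfl

theorem sizePass_eq (space : PVMat) :
    (PySem.List.pyRange 0 ((nno space : Nat) : Int) 1).foldl (fun d k =>
      PySem.Dict.insert d (PySem.List.pyGetD (rootL space) k 0)
        (PySem.Dict.getD d (PySem.List.pyGetD (rootL space) k 0) 0 + 1)) PySem.Dict.empty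
    = sizeD space := by
  rw [PySem.List.pyRange_zero_nat, List.foldl_map, sizeD]
  conv_rhs => rw [rootL, List.foldl_map]
  apply PySem.List.foldl_congr_mem
  intro d k hk
  rw [rootL_get (List.mem_range.1 hk)]

def bodyL (space : PVMat) (st : PySem.Dict Int Int × List Int × Int × Int) (k : Nat) :
    PySem.Dict Int Int × List Int × Int × Int :=
  if ¬ PySem.Dict.contains st.1 ((rho space k : Nat) : Int) then
    if 3 ≤ ((szN space (rho space k) : Nat) : Int) then
      (PySem.Dict.insert st.1 ((rho space k : Nat) : Int) st.2.2.2,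
       PySem.Set.add st.2.1 st.2.2.2,
       st.2.2.1 + ((szN space (rho space k) : Nat) : Int), st.2.2.2 + 1)
    else (PySem.Dict.insert st.1 ((rho space k : Nat) : Int) st.2.2.2,
          st.2.1, st.2.2.1, st.2.2.2 + 1)
  else st

theorem stPass_eq (space : PVMat) :
    (PySem.List.pyRange 0 ((nno space : Nat) : Int) 1).foldl
      (fun (st : PySem.Dict Int Int × List Int × Int × Int) k =>
        let r := PySem.List.pyGetD (rootL space) k 0
        if ¬ PySem.Dict.contains st.1 r then
          let label := PySem.Dict.insert st.1 r st.2.2.2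
          if 3 ≤ PySem.Dict.getD (sizeD space) r 0 then
            (label, PySem.Set.add st.2.1 st.2.2.2, st.2.2.1 + PySem.Dict.getD (sizeD space) r 0,
             st.2.2.2 + 1)
          else (label, st.2.1, st.2.2.1, st.2.2.2 + 1)
        else st)
      (PySem.Dict.empty, ([] : List Int), (0 : Int), (1 : Int))
    = (List.range (nno space)).foldl (bodyL space)
        (PySem.Dict.empty, ([] : List Int), (0 : Int), (1 : Int)) := by
  rw [PySem.List.pyRange_zero_nat, List.foldl_map]
  apply PySem.List.foldl_congr_mem
  intro st k hk
  have hkn : k < nno space := List.mem_range.1 hk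
  have hr := rootL_get (space := space) hkn
  have hsz := szB_eq space (rho space k)
  rw [bodyL]
  simp only [hr]
  rw [show PySem.Dict.getD (sizeD space) ((rho space k : Nat) : Int) 0 =
      ((szN space (rho space k) : Nat) : Int) from hsz]

def LInv (space : PVMat) (t : Nat) (st : PySem.Dict Int Int × List Int × Int × Int) : Prop :=
  (∀ r : Nat, r < t → rho space r = r →
    PySem.Dict.get? st.1 ((r : Nat) : Int) = some ((labN space r : Nat) : Int)) ∧
  (∀ x : Int, (∀ r : Nat, r < t → rho space r = r → x ≠ ((r : Nat) : Int)) →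
    PySem.Dict.get? st.1 x = none) ∧
  st.2.1 = delT space t ∧ st.2.2.1 = cntT space t ∧ st.2.2.2 = idxT space t

theorem LInv_step {space : PVMat} {t : Nat} (ht : t < nno space)
    {st : PySem.Dict Int Int × List Int × Int × Int} (h : LInv space t st) :
    LInv space (t + 1) (bodyL space st t) := by
  obtain ⟨hin, hout, hdel, hcnt, hidx⟩ := h
  have hrle := rho_le space t
  have hminsBig : minsBig space (t + 1) =
      minsBig space t ++ (if rho space t = t ∧ 3 ≤ szN space t then [t] else []) := by
    rw [minsBig, minsBig, List.range_succ, List.filter_append]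
    congr 1
    by_cases hr : rho space t = t <;> by_cases h3 : 3 ≤ szN space t <;> simp [hr, h3]
  by_cases hroot : rho space t = t
  · have hnone : PySem.Dict.get? st.1 ((t : Nat) : Int) = none := by
      apply hout
      intro r' hr' _ hx
      have : t = r' := by exact_mod_cast hx
      omega
    have hcont : PySem.Dict.contains st.1 ((t : Nat) : Int) = false :=
      (PySem.Dict.get?_eq_none_iff_contains _ _).1 hnone
    rw [bodyL, hroot, if_pos (by simp [hcont])]
    have hidxlab : st.2.2.2 = ((labN space t : Nat) : Int) := by rw [hidx]; rfl
    have hinsert : ∀ x : Int,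
        PySem.Dict.get? (PySem.Dict.insert st.1 ((t : Nat) : Int) st.2.2.2) x =
          if x = ((t : Nat) : Int) then some ((labN space t : Nat) : Int)
          else PySem.Dict.get? st.1 x := by
      intro x
      rw [PySem.Dict.get?_insert, hidxlab]
    have hin' : ∀ r : Nat, r < t + 1 → rho space r = r →
        PySem.Dict.get? (PySem.Dict.insert st.1 ((t : Nat) : Int) st.2.2.2) ((r : Nat) : Int) =
          some ((labN space r : Nat) : Int) := by
      intro r hr hmin
      rw [hinsert]
      by_cases hrt : r = t
      · subst hrt
        rw [if_pos rfl]
      · rw [if_neg (by exact_mod_cast hrt), hin r (by omega) hmin]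
    have hout' : ∀ x : Int,
        (∀ r : Nat, r < t + 1 → rho space r = r → x ≠ ((r : Nat) : Int)) →
        PySem.Dict.get? (PySem.Dict.insert st.1 ((t : Nat) : Int) st.2.2.2) x = none := by
      intro x hx
      rw [hinsert, if_neg (hx t (by omega) hroot), hout]
      intro r hr hmin
      exact hx r (by omega) hmin
    by_cases h3 : 3 ≤ szN space t
    · rw [if_pos (by exact_mod_cast h3)]
      refine ⟨hin', hout', ?_, ?_, ?_⟩
      · show PySem.Set.add st.2.1 st.2.2.2 = delT space (t + 1)
        rw [hdel, hidxlab, set_add_fresh _ _ (notin_delT hroot)]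
        rw [delT, delT, hminsBig, List.map_append, if_pos ⟨hroot, h3⟩]
        simp
      · show st.2.2.1 + ((szN space t : Nat) : Int) = cntT space (t + 1)
        rw [hcnt, cntT, cntT, hminsBig, List.map_append, List.sum_append, if_pos ⟨hroot, h3⟩]
        simp
      · show st.2.2.2 + 1 = idxT space (t + 1)
        rw [hidx, idxT, idxT, List.range_succ, List.countP_append]
        have : List.countP (fun m => rho space m == m) [t] = 1 := by
          simp [List.countP_cons, hroot]
        rw [this]
        push_cast
        ring
    · rw [if_neg (by exact_mod_cast h3)]
      refine ⟨hin', hout', ?_, ?_, ?_⟩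
      · show st.2.1 = delT space (t + 1)
        rw [hdel, delT, delT, hminsBig, List.map_append, if_neg (fun hh => h3 hh.2)]
        simp
      · show st.2.2.1 = cntT space (t + 1)
        rw [hcnt, cntT, cntT, hminsBig, List.map_append, List.sum_append,
            if_neg (fun hh => h3 hh.2)]
        simp
      · show st.2.2.2 + 1 = idxT space (t + 1)
        rw [hidx, idxT, idxT, List.range_succ, List.countP_append]
        have : List.countP (fun m => rho space m == m) [t] = 1 := by
          simp [List.countP_cons, hroot]
        rw [this]
        push_cast
        ring
  · -- ρ t < t: the root was seen before, the branch does not fire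
    have hlt : rho space t < t := by omega
    have hsome := hin (rho space t) hlt (rho_idem ht)
    have hcont : PySem.Dict.contains st.1 ((rho space t : Nat) : Int) = true := by
      by_cases hc : PySem.Dict.contains st.1 ((rho space t : Nat) : Int) = true
      · exact hc
      · have := (PySem.Dict.get?_eq_none_iff_contains st.1 ((rho space t : Nat) : Int)).2
          (by simpa using hc)
        rw [this] at hsome
        exact absurd hsome (by simp)
    rw [bodyL, if_neg (by simp [hcont])]
    have hnomin : rho space t ≠ t := hroot
    have hsame : minsBig space (t + 1) = minsBig space t := by
      rw [hminsBig, if_neg (fun hh => hroot hh.1)]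
      simp
    refine ⟨?_, ?_, ?_, ?_, ?_⟩
    · intro r hr hmin
      apply hin r ?_ hmin
      rcases Nat.lt_or_ge r t with h | h
      · exact h
      · exfalso
        have : r = t := by omega
        subst this
        exact hroot hmin
    · intro x hx
      apply hout
      intro r hr hmin
      exact hx r (by omega) hmin
    · rw [hdel, delT, delT, hsame]
    · rw [hcnt, cntT, cntT, hsame]
    · rw [hidx, idxT, idxT, List.range_succ, List.countP_append]
      have : List.countP (fun m => rho space m == m) [t] = 0 := by
        simp [hroot]
      rw [this]
      norm_num

theorem LInv_fold (space : PVMat) :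
    ∀ t, t ≤ nno space →
      LInv space t ((List.range t).foldl (bodyL space)
        (PySem.Dict.empty, ([] : List Int), (0 : Int), (1 : Int))) := by
  intro t
  induction t with
  | zero =>
    intro _
    refine ⟨?_, ?_, rfl, rfl, rfl⟩
    · intro r hr
      omega
    · intro x _
      rfl
  | succ u ih =>
    intro hu
    rw [List.range_succ, List.foldl_append]
    simp only [List.foldl_cons, List.foldl_nil]
    exact LInv_step (by omega) (ih (by omega))


theorem labelsPass_eq (space : PVMat) :
    (PySem.List.pyRange 0 ((nno space : Nat) : Int) 1).map (fun k =>
      PySem.Dict.getD ((List.range (nno space)).foldl (bodyL space)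
        (PySem.Dict.empty, ([] : List Int), (0 : Int), (1 : Int))).1
        (PySem.List.pyGetD (rootL space) k 0) 0)
    = (List.range (nno space)).map (fun k => ((labN space (rho space k) : Nat) : Int)) := by
  obtain ⟨hin, _, _, _, _⟩ := LInv_fold space (nno space) (le_refl _)
  rw [PySem.List.pyRange_zero_nat, List.map_map]
  apply List.map_congr_left
  intro k hk
  have hkn := List.mem_range.1 hk
  simp only [Function.comp_apply]
  rw [rootL_get hkn, PySem.Dict.getD_eq_get?_getD,
      hin (rho space k) (rho_lt hkn) (rho_idem hkn)]
  rfl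

theorem visPass_eq (space : PVMat) :
    (PySem.List.pyRange 0 ((Rn space : Nat) : Int) 1).map (fun i =>
      PySem.List.slice
        ((List.range (nno space)).map (fun k => ((labN space (rho space k) : Nat) : Int)))
        (some (i * ((Cn space : Nat) : Int))) (some ((i + 1) * ((Cn space : Nat) : Int))))
    = visSpec space := by
  rw [PySem.List.pyRange_zero_nat, List.map_map, visSpec]
  apply List.map_congr_left
  intro i hi
  have hiR := List.mem_range.1 hi
  simp only [Function.comp_apply]
  have hc1 : ((i : Nat) : Int) * ((Cn space : Nat) : Int) = ((i * Cn space : Nat) : Int) := by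
    push_cast; ring
  have hc2 : (((i : Nat) : Int) + 1) * ((Cn space : Nat) : Int) =
      ((i * Cn space : Nat) : Int) + ((Cn space : Nat) : Int) := by
    push_cast; ring
  rw [hc1, hc2, PySem.List.slice_natCast_add]
  have hle : i * Cn space + Cn space ≤ nno space := by
    rw [nno]
    calc i * Cn space + Cn space = (i + 1) * Cn space := by ring
      _ ≤ Rn space * Cn space := Nat.mul_le_mul_right _ (by omega)
  apply List.ext_getElem
  · simp
    omega
  · intro a h1 h2
    simp

theorem B_eq (space : PVMat) :
    has_found_alt space = (space, visSpec space, delSpec space, cntSpec space) := by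
  have hR : space.length = Rn space := rfl
  have hC : (space.headD []).length = Cn space := rfl
  have hn : ((Rn space : Nat) : Int) * ((Cn space : Nat) : Int) = ((nno space : Nat) : Int) := by
    rw [nno]; push_cast; ring
  simp only [has_found_alt]
  rw [hR, hC, hn, valsB_eq, parent_pass_eq, rootMap_eq, sizePass_eq, stPass_eq,
      labelsPass_eq, visPass_eq]
  obtain ⟨_, _, hdel, hcnt, _⟩ := LInv_fold space (nno space) (le_refl _)
  rw [hdel, hcnt]
  rfl

-- ===== VERDICT (by name: the statement is the Claim_ definition above) =====
theorem has_found_spec : Claim_equal_has_found := by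
  intro space _ _
  unfold Spec_has_found
  rw [A_eq, B_eq]
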